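-- pv_equiv track=rewrite | github.com/dsaClass/dsa2020 | openjudge/6044/2300010855.py | min_time_to_reach_sasuke
-- ===== SOURCE A (Python) =====
-- from collections import deque
--
-- def min_time_to_reach_sasuke(M, N, T, grid):
--     """
--     计算鸣人追上佐助的最短时间。
--
--     参数:
--     M (int): 网格的行数
--     N (int): 网格的列数
--     T (int): 鸣人初始的查克拉值
--     grid (List[List[str]]): 网格地图，包含 '@' (鸣人), '+' (佐助), '*' (空地), '#' (障碍)
--
--     返回:
--     int: 到达佐助的最短时间，如果无法到达则返回 -1
--     """
--     # 找到鸣人的起始位置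
--     for i in range(M):
--         for j in range(N):
--             if grid[i][j] == '@':
--                 start_x, start_y = i, j
--                 break
--
--     # 定义四个方向的移动：上、下、左、右
--     directions = [(-1, 0), (1, 0), (0, -1), (0, 1)]
--
--     # BFS队列，存储状态：(x, y, t, time)
--     # x, y: 当前位置坐标
--     # t: 剩余查克拉
--     # time: 已用时间
--     queue = deque([(start_x, start_y, T, 0)])
--
--     # 访问标记，防止重复访问相同状态 (x, y, t)
--     visited = [[[False] * (T + 1) for _ in range(N)] for _ in range(M)]
--     visited[start_x][start_y][T] = True
--
--     while queue:
--         x, y, t, time = queue.popleft()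
--
--         # 如果当前位置是佐助的位置 '+'
--         if grid[x][y] == '+':
--             return time
--
--         # 尝试向四个方向移动
--         for dx, dy in directions:
--             nx, ny = x + dx, y + dy
--             # 检查新位置是否在网格范围内
--             if 0 <= nx < M and 0 <= ny < N:
--                 if grid[nx][ny] in ('*', '+'):
--                     # 如果下一个位置是空地 '*' 或佐助 '+'
--                     if not visited[nx][ny][t]:
--                         visited[nx][ny][t] = True
--                         queue.append((nx, ny, t, time + 1))
--                 elif grid[nx][ny] == '#':
--                     # 如果下一个位置是障碍 '#'
--                     if t > 0 and not visited[nx][ny][t - 1]: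
--                         visited[nx][ny][t - 1] = True
--                         queue.append((nx, ny, t - 1, time + 1))
--
--     # 如果无法到达佐助
--     return -1
-- ===== SOURCE B (Python) =====
-- def min_time_to_reach_sasuke(M, N, T, grid):
--     """Bellman-Ford-style value iteration: keep a 3D earliest-arrival table
--     dist[x][y][t] and repeatedly relax every finite entry over the four
--     moves (goal cells are terminal) until the table stops changing, then
--     answer with the minimum over Sasuke's cells.  No queue, no visited
--     flags, no early exit during the search."""
--     for i in range(M):
--         for j in range(N):
--             if grid[i][j] == '@':
--                 sx, sy = i, j
--                 break
--
--     S = M * N * (T + 1)        # number of states bounds every arrival time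
--     INF = S + 1
--     dist = [[[INF] * (T + 1) for _ in range(N)] for _ in range(M)]
--     dist[sx][sy][T] = 0
--
--     for _ in range(S):
--         nxt = [[row[:] for row in plane] for plane in dist]
--         for x in range(M):
--             for y in range(N):
--                 for t in range(T + 1):
--                     d = dist[x][y][t]
--                     if d < INF and grid[x][y] != '+':
--                         for nx, ny in ((x - 1, y), (x + 1, y), (x, y - 1), (x, y + 1)):
--                             if 0 <= nx < M and 0 <= ny < N:
--                                 c = grid[nx][ny]
--                                 if c == '*' or c == '+':
--                                     nt = t
--                                 elif c == '#' and t > 0: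
--                                     nt = t - 1
--                                 else:
--                                     continue
--                                 if d + 1 < nxt[nx][ny][nt]:
--                                     nxt[nx][ny][nt] = d + 1
--         if nxt == dist:
--             break
--         dist = nxt
--
--     best = INF
--     for x in range(M):
--         for y in range(N):
--             if grid[x][y] == '+':
--                 for t in range(T + 1):
--                     if dist[x][y][t] < best:
--                         best = dist[x][y][t]
--     return best if best < INF else -1
-- ===== Notes on version B (the rewrite author's own statement) =====
-- stated objective: alternative
-- what changed: A's FIFO-queue BFS over (x, y, chakra, time) states with dequeue-time goal test is replaced by Bellman-Ford-style value iteration: a full 3D earliest-arrival table is relaxed in synchronous sweeps (reading the old table, writing mins into a fresh copy) until it stops changing, and the answer is the minimum table value over Sasuke's cells, -1 if none is finite.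
-- outside the precondition, e.g. on min_time_to_reach_sasuke(1, 3, 0, [['@', '#']]): A returns -1, B raises IndexError
import Mathlib
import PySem

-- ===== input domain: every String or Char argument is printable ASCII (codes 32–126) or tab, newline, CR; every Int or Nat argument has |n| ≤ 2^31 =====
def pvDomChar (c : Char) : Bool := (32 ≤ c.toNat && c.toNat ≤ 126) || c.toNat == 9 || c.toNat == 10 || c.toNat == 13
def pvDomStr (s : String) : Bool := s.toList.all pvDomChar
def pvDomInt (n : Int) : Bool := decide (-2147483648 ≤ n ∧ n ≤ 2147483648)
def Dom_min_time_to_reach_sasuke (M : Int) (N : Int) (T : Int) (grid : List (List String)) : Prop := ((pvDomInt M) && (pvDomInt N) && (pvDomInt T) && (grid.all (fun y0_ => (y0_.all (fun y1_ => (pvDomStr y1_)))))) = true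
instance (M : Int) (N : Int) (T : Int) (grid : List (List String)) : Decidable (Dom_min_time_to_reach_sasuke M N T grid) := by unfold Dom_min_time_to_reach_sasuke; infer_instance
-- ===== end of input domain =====

-- B replaces A's FIFO-queue BFS by Bellman-Ford-style value iteration: a full 3D earliest-arrival
-- table is relaxed in synchronous sweeps until it stops changing, then the minimum over Sasuke's
-- cells is taken; objective: alternative algorithm, same exact results (B is not faster).

-- ===== PORT A ===== (single FIFO queue of (x, y, chakra, time); goal test at dequeue)

-- start scan: for each row, first '@' within the first N cells; a later row overwrites (A's inner-only break)
def pvStart (M : Int) (N : Int) (grid : List (List String)) : Option (Nat × Nat) :=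
  (List.range M.toNat).foldl (fun acc i =>
      match ((grid.getD i []).take N.toNat).findIdx? (fun c => c == "@") with
      | some j => some (i, j)
      | none => acc) none

-- grid[x][y] for the 0 ≤ x < M, 0 ≤ y < N accesses (defaults unreachable under Pre_)
def pvCell (grid : List (List String)) (x y : Int) : String :=
  (grid.getD x.toNat []).getD y.toNat ""

-- visited[x][y][t], a 3D Bool table exactly as Python A builds it
abbrev pvVis := List (List (List Bool))

def pvVis0 (M N T : Int) : pvVis :=
  List.replicate M.toNat (List.replicate N.toNat (List.replicate (T.toNat + 1) false))

-- out-of-range reads answer `true` (the real runs only read in-range cells; `true` = "skip", which keeps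
-- the unvisited-count fuel bound's counting argument below unconditional)
def pvGet3 (v : pvVis) (x y t : Int) : Bool :=
  if 0 ≤ x ∧ 0 ≤ y ∧ 0 ≤ t then
    match v[x.toNat]? with
    | none => true
    | some p =>
      match p[y.toNat]? with
      | none => true
      | some r =>
        match r[t.toNat]? with
        | none => true
        | some b => b
  else true

def pvSet3 (v : pvVis) (x y t : Int) : pvVis :=
  if 0 ≤ x ∧ 0 ≤ y ∧ 0 ≤ t then
    v.set x.toNat ((v.getD x.toNat []).set y.toNat
      (((v.getD x.toNat []).getD y.toNat []).set t.toNat true))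
  else v

-- number of unvisited entries: bounds the remaining work of A's BFS loop (fuel argument)
def pvFc1 (r : List Bool) : Nat := r.count false
def pvFc2 (p : List (List Bool)) : Nat := (p.map pvFc1).sum
def pvFc3 (v : pvVis) : Nat := (v.map pvFc2).sum

-- one direction of A's transition rule ('*'/'+' keep chakra, '#' costs one), marking visited at enqueue
def pvStep1 (M N : Int) (grid : List (List String)) (nx ny t : Int)
    (acc : List (Int × Int × Int) × pvVis) : List (Int × Int × Int) × pvVis :=
  if 0 ≤ nx ∧ nx < M ∧ 0 ≤ ny ∧ ny < N then
    if pvCell grid nx ny == "*" || pvCell grid nx ny == "+" then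
      if pvGet3 acc.2 nx ny t then acc
      else (acc.1 ++ [(nx, ny, t)], pvSet3 acc.2 nx ny t)
    else if pvCell grid nx ny == "#" then
      if 0 < t ∧ pvGet3 acc.2 nx ny (t - 1) = false then
        (acc.1 ++ [(nx, ny, t - 1)], pvSet3 acc.2 nx ny (t - 1))
      else acc
    else acc
  else acc

def pvDirs : List (Int × Int) := [(-1, 0), (1, 0), (0, -1), (0, 1)]

-- the four-direction loop of Python A for one dequeued state
def pvExpand (M N : Int) (grid : List (List String)) (s : Int × Int × Int) (v : pvVis) :
    List (Int × Int × Int) × pvVis :=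
  pvDirs.foldl (fun acc d => pvStep1 M N grid (s.1 + d.1) (s.2.1 + d.2) s.2.2 acc) ([], v)

-- fuel is only a totality guard: each iteration pops one state and every enqueue turns one
-- unvisited entry visited, so the loop makes at most 1 + pvFc3 v iterations; the caller passes more
def pvLoopA (M N : Int) (grid : List (List String)) :
    Nat → List (Int × Int × Int × Int) → pvVis → Int
  | 0, _, _ => -1
  | _ + 1, [], _ => -1
  | f + 1, (x, y, t, time) :: rest, v =>
    if pvCell grid x y == "+" then time
    else
      let r := pvExpand M N grid (x, y, t) v
      pvLoopA M N grid f (rest ++ r.1.map (fun s => (s.1, s.2.1, s.2.2, time + 1))) r.2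

def min_time_to_reach_sasuke (M : Int) (N : Int) (T : Int) (grid : List (List String)) : Int :=
  match pvStart M N grid with
  | none => -1  -- Python A raises NameError here (no '@'); excluded by Pre_
  | some (si, sj) =>
    let sx : Int := si
    let sy : Int := sj
    let v := pvSet3 (pvVis0 M N T) sx sy T
    pvLoopA M N grid (2 + pvFc3 v) [(sx, sy, T, 0)] v

-- ===== PORT B ===== (value iteration: synchronous relaxation sweeps of a 3D arrival-time table)

def pvInf (M N T : Int) : Int := M * N * (T + 1) + 1

def pvT0 (M N T : Int) : List (List (List Int)) :=
  List.replicate M.toNat (List.replicate N.toNat (List.replicate (T.toNat + 1) (pvInf M N T)))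

def pvGetI (D : List (List (List Int))) (x y t : Int) : Int :=
  ((D.getD x.toNat []).getD y.toNat []).getD t.toNat 0

def pvSetI (D : List (List (List Int))) (x y t val : Int) : List (List (List Int)) :=
  D.set x.toNat ((D.getD x.toNat []).set y.toNat
    (((D.getD x.toNat []).getD y.toNat []).set t.toNat val))

-- relax one outgoing move of cell (x,y) at chakra t with current value d ('continue' = no write)
def pvRelaxDir (M N : Int) (grid : List (List String)) (x y t d : Int)
    (nxt : List (List (List Int))) (dir : Int × Int) : List (List (List Int)) :=
  let nx := x + dir.1
  let ny := y + dir.2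
  if 0 ≤ nx ∧ nx < M ∧ 0 ≤ ny ∧ ny < N then
    let c := pvCell grid nx ny
    let nt? : Option Int :=
      if c == "*" || c == "+" then some t
      else if c == "#" && decide (0 < t) then some (t - 1)
      else none
    match nt? with
    | some nt => if d + 1 < pvGetI nxt nx ny nt then pvSetI nxt nx ny nt (d + 1) else nxt
    | none => nxt
  else nxt

-- body of B's three nested coordinate loops: skip INF entries and goal cells, else relax 4 moves
def pvRelaxCell (M N T : Int) (grid : List (List String))
    (dist nxt : List (List (List Int))) (x y t : Int) : List (List (List Int)) :=
  let d := pvGetI dist x y t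
  if d < pvInf M N T ∧ pvCell grid x y ≠ "+" then
    pvDirs.foldl (pvRelaxDir M N grid x y t d) nxt
  else nxt

-- one synchronous sweep: nxt starts as a copy of dist, reads d from dist, writes mins into nxt
def pvRound (M N T : Int) (grid : List (List String))
    (dist : List (List (List Int))) : List (List (List Int)) :=
  (PySem.List.pyRange 0 M 1).foldl (fun nxt x =>
    (PySem.List.pyRange 0 N 1).foldl (fun nxt y =>
      (PySem.List.pyRange 0 (T + 1) 1).foldl (fun nxt t =>
        pvRelaxCell M N T grid dist nxt x y t) nxt) nxt) dist

-- 'for _ in range(S): ... if nxt == dist: break; dist = nxt'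
def pvSweep (M N T : Int) (grid : List (List String)) :
    Nat → List (List (List Int)) → List (List (List Int))
  | 0, dist => dist
  | f + 1, dist =>
    let nxt := pvRound M N T grid dist
    if nxt = dist then dist else pvSweep M N T grid f nxt

-- final pass: minimum arrival value over Sasuke's cells ('+'), seeded with INF
def pvBest (M N T : Int) (grid : List (List String))
    (dist : List (List (List Int))) : Int :=
  (PySem.List.pyRange 0 M 1).foldl (fun best x =>
    (PySem.List.pyRange 0 N 1).foldl (fun best y =>
      if pvCell grid x y == "+" then
        (PySem.List.pyRange 0 (T + 1) 1).foldl (fun best t =>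
          if pvGetI dist x y t < best then pvGetI dist x y t else best) best
      else best) best) (pvInf M N T)

def min_time_to_reach_sasuke_alt (M : Int) (N : Int) (T : Int) (grid : List (List String)) : Int :=
  match pvStart M N grid with
  | none => -1  -- Python B raises NameError here too (no '@'); excluded by Pre_
  | some (si, sj) =>
    let dist := pvSetI (pvT0 M N T) si sj T 0
    let fin := pvSweep M N T grid (M * N * (T + 1)).toNat dist
    let best := pvBest M N T grid fin
    if best < pvInf M N T then best else -1

-- ===== PRECONDITION & SPEC =====
-- Pre_ = inputs where Python A returns: chakra T ≥ 0 (negative T makes A's visited[sx][sy][T] an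
-- IndexError), at least M rows, an '@' in the M×N region (else NameError), and each of the first M
-- rows of length ≥ N.  The last condition slightly over-excludes: on a ragged row whose short tail
-- is hidden behind an early '@' and never touched by the BFS, A still returns (see cites); the exact
-- crash set is reachability-dependent, not closed-form.
def Pre_min_time_to_reach_sasuke (M : Int) (N : Int) (T : Int) (grid : List (List String)) : Prop :=
  0 ≤ T ∧ M.toNat ≤ grid.length ∧
    (∀ row ∈ grid.take M.toNat, N.toNat ≤ row.length) ∧
    (∃ row ∈ grid.take M.toNat, "@" ∈ row.take N.toNat)
instance (M : Int) (N : Int) (T : Int) (grid : List (List String)) : Decidable (Pre_min_time_to_reach_sasuke M N T grid) := by unfold Pre_min_time_to_reach_sasuke; infer_instance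

def pvWitness_min_time_to_reach_sasuke : Int × Int × Int × List (List String) :=
  (3, 3, 1, [["@", "*", "#"], ["#", "#", "#"], ["*", "*", "+"]])

def Spec_min_time_to_reach_sasuke (M : Int) (N : Int) (T : Int) (grid : List (List String)) (out : Int) : Prop := out = min_time_to_reach_sasuke_alt M N T grid
instance (M : Int) (N : Int) (T : Int) (grid : List (List String)) (out : Int) : Decidable (Spec_min_time_to_reach_sasuke M N T grid out) := by unfold Spec_min_time_to_reach_sasuke; infer_instance

-- ===== CLAIM (what is proved, stated in full; the proofs are below) =====
def Claim_equal_min_time_to_reach_sasuke : Prop := ∀ (M : Int) (N : Int) (T : Int) (grid : List (List String)), Dom_min_time_to_reach_sasuke M N T grid → Pre_min_time_to_reach_sasuke M N T grid → Spec_min_time_to_reach_sasuke M N T grid (min_time_to_reach_sasuke M N T grid)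

-- ===== LEMMAS AND PROOFS =====

-- ---------- proof-side devices shared by both directions ----------

-- the level-synchronous view of A's queue loop (frontier of (x,y,chakra), time = depth)
def pvExpandLevel (M N : Int) (grid : List (List String)) (front : List (Int × Int × Int))
    (v : pvVis) : List (Int × Int × Int) × pvVis :=
  front.foldl (fun acc s =>
    let r := pvExpand M N grid s acc.2
    (acc.1 ++ r.1, r.2)) ([], v)

def pvLoopB (M N : Int) (grid : List (List String)) :
    Nat → List (Int × Int × Int) → pvVis → Int → Int
  | 0, _, _, _ => -1
  | _ + 1, [], _, _ => -1
  | f + 1, s :: rest, v, time =>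
    if (s :: rest).any (fun q => pvCell grid q.1 q.2.1 == "+") then time
    else
      let r := pvExpandLevel M N grid (s :: rest) v
      pvLoopB M N grid f r.1 r.2 (time + 1)

-- target of one move from state s in direction dir (shared transition rule of both programs)
def pvTgt (M N : Int) (grid : List (List String)) (s : Int × Int × Int) (dir : Int × Int) :
    Option (Int × Int × Int) :=
  if 0 ≤ s.1 + dir.1 ∧ s.1 + dir.1 < M ∧ 0 ≤ s.2.1 + dir.2 ∧ s.2.1 + dir.2 < N then
    if pvCell grid (s.1 + dir.1) (s.2.1 + dir.2) == "*"
        || pvCell grid (s.1 + dir.1) (s.2.1 + dir.2) == "+" then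
      some (s.1 + dir.1, s.2.1 + dir.2, s.2.2)
    else if pvCell grid (s.1 + dir.1) (s.2.1 + dir.2) = "#" ∧ 0 < s.2.2 then
      some (s.1 + dir.1, s.2.1 + dir.2, s.2.2 - 1)
    else none
  else none

def pvInbnd (M N T : Int) (s : Int × Int × Int) : Prop :=
  0 ≤ s.1 ∧ s.1 < M ∧ 0 ≤ s.2.1 ∧ s.2.1 < N ∧ 0 ≤ s.2.2 ∧ s.2.2 ≤ T

def pvEdge (M N : Int) (grid : List (List String)) (p s : Int × Int × Int) : Prop :=
  ∃ d ∈ pvDirs, pvTgt M N grid p d = some s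

-- ideal level sets: states reachable in ≤ k steps (goal cells are terminal)
def pvV (M N : Int) (grid : List (List String)) (st0 : Int × Int × Int) :
    Nat → (Int × Int × Int) → Prop
  | 0, s => s = st0
  | k + 1, s => pvV M N grid st0 k s ∨
      ∃ p, pvV M N grid st0 k p ∧ pvCell grid p.1 p.2.1 ≠ "+" ∧ pvEdge M N grid p s

-- previous level (used to characterise the frontier)
def pvVb (M N : Int) (grid : List (List String)) (st0 : Int × Int × Int) :
    Nat → (Int × Int × Int) → Prop
  | 0, _ => False
  | k + 1, s => pvV M N grid st0 k s

def pvHit (M N : Int) (grid : List (List String)) (st0 : Int × Int × Int) (k : Nat) : Prop :=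
  ∃ s, pvV M N grid st0 k s ∧ pvCell grid s.1 s.2.1 = "+"

noncomputable def pvLev (M N : Int) (grid : List (List String)) (st0 s : Int × Int × Int) : Nat :=
  sInf {k | pvV M N grid st0 k s}

-- value-table characterisation after r sweeps
def pvShape (M N T : Int) (D : List (List (List Int))) : Prop :=
  D.length = M.toNat ∧ ∀ pl ∈ D, pl.length = N.toNat ∧ ∀ row ∈ pl, row.length = T.toNat + 1

def pvCharD (M N T : Int) (grid : List (List String)) (st0 : Int × Int × Int) (r : Nat)
    (D : List (List (List Int))) : Prop :=
  pvShape M N T D ∧ ∀ s, pvInbnd M N T s →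
    (pvV M N grid st0 r s → pvGetI D s.1 s.2.1 s.2.2 = (pvLev M N grid st0 s : Int)) ∧
    (¬ pvV M N grid st0 r s → pvGetI D s.1 s.2.1 s.2.2 = pvInf M N T)

-- ---------- counting: every enqueue turns one unvisited entry visited ----------

theorem pvCount_set_true (r : List Bool) (n : Nat) (h : r[n]? = some false) :
    (r.set n true).count false + 1 = r.count false := by
  induction r generalizing n with
  | nil => simp at h
  | cons b rs ih =>
    cases n with
    | zero => simp at h; simp [h]
    | succ m =>
      simp at h
      simp [List.set, List.count_cons, ← ih m h]
      omega

theorem pvSum_map_set {α : Type} (g : α → Nat) (l : List α) (n : Nat) (a b : α)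
    (h : l[n]? = some a) :
    ((l.set n b).map g).sum + g a = (l.map g).sum + g b := by
  induction l generalizing n with
  | nil => simp at h
  | cons c cs ih =>
    cases n with
    | zero => simp at h; subst h; simp; omega
    | succ m =>
      simp at h
      have := ih m h
      simp only [List.set_cons_succ, List.map_cons, List.sum_cons]
      omega

theorem pvFc3_set3 (v : pvVis) (x y t : Int) (h : pvGet3 v x y t = false) :
    pvFc3 (pvSet3 v x y t) + 1 = pvFc3 v := by
  unfold pvGet3 at h
  unfold pvSet3
  split at h
  case isFalse => simp at h
  case isTrue hxyz =>
    rw [if_pos hxyz]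
    split at h
    case h_1 => simp at h
    case h_2 p hp =>
      split at h
      case h_1 => simp at h
      case h_2 r hr =>
        split at h
        case h_1 => simp at h
        case h_2 b hb =>
          subst h
          have hgp : v.getD x.toNat [] = p := by
            simp [List.getD_eq_getElem?_getD, hp]
          have hgr : p.getD y.toNat [] = r := by
            simp [List.getD_eq_getElem?_getD, hr]
          rw [hgp, hgr]
          have h3 := pvCount_set_true r t.toNat hb
          have h2 := pvSum_map_set pvFc1 p y.toNat r (r.set t.toNat true) hr
          have h1 := pvSum_map_set pvFc2 v x.toNat p (p.set y.toNat (r.set t.toNat true)) hp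
          simp only [pvFc3, pvFc2, pvFc1] at h1 h2 h3 ⊢
          omega

theorem pvStep1_fc (M N : Int) (grid : List (List String)) (nx ny t : Int)
    (acc : List (Int × Int × Int) × pvVis) :
    pvFc3 (pvStep1 M N grid nx ny t acc).2 + (pvStep1 M N grid nx ny t acc).1.length
      = pvFc3 acc.2 + acc.1.length := by
  unfold pvStep1
  split_ifs with h1 h2 h3 h4 h5
  · rfl
  · have := pvFc3_set3 acc.2 nx ny t (by simpa using h3)
    simp
    omega
  · have := pvFc3_set3 acc.2 nx ny (t - 1) h5.2
    simp
    omega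
  · rfl
  · rfl
  · rfl

theorem pvFoldl_fc {α : Type} (g : List (Int × Int × Int) × pvVis → α → List (Int × Int × Int) × pvVis)
    (hg : ∀ acc a, pvFc3 (g acc a).2 + (g acc a).1.length = pvFc3 acc.2 + acc.1.length)
    (l : List α) (acc : List (Int × Int × Int) × pvVis) :
    pvFc3 (l.foldl g acc).2 + (l.foldl g acc).1.length = pvFc3 acc.2 + acc.1.length := by
  induction l generalizing acc with
  | nil => rfl
  | cons a as ih => rw [List.foldl_cons, ih, hg]

theorem pvExpand_fc (M N : Int) (grid : List (List String)) (s : Int × Int × Int) (v : pvVis) :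
    pvFc3 (pvExpand M N grid s v).2 + (pvExpand M N grid s v).1.length = pvFc3 v := by
  have := pvFoldl_fc (fun acc d => pvStep1 M N grid (s.1 + d.1) (s.2.1 + d.2) s.2.2 acc)
    (fun acc d => pvStep1_fc M N grid (s.1 + d.1) (s.2.1 + d.2) s.2.2 acc) pvDirs ([], v)
  simpa [pvExpand] using this

theorem pvExpandLevel_fc (M N : Int) (grid : List (List String)) (front : List (Int × Int × Int))
    (v : pvVis) :
    pvFc3 (pvExpandLevel M N grid front v).2 + (pvExpandLevel M N grid front v).1.length
      = pvFc3 v := by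
  have := pvFoldl_fc (fun acc s => ((acc.1 ++ (pvExpand M N grid s acc.2).1, (pvExpand M N grid s acc.2).2) : List (Int × Int × Int) × pvVis))
    (fun acc s => by have := pvExpand_fc M N grid s acc.2; simp; omega) front ([], v)
  simpa [pvExpandLevel] using this

-- ---------- A's queue loop equals the level loop ----------

-- tagging a frontier with a common time stamp gives A's queue entries
def pvTag4 (k : Int) (l : List (Int × Int × Int)) : List (Int × Int × Int × Int) :=
  l.map (fun s => (s.1, s.2.1, s.2.2, k))

-- the result of A's loop does not depend on the fuel once it exceeds queue + unvisited count
theorem pvLoopA_fuel (M N : Int) (grid : List (List String)) :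
    ∀ (f g : Nat) (q : List (Int × Int × Int × Int)) (v : pvVis),
    q.length + pvFc3 v < f → q.length + pvFc3 v < g →
    pvLoopA M N grid f q v = pvLoopA M N grid g q v := by
  intro f
  induction f with
  | zero => intro g q v hf; omega
  | succ f ih =>
    intro g q v hf hg
    cases g with
    | zero => omega
    | succ g =>
      cases q with
      | nil => rfl
      | cons h rest =>
        obtain ⟨x, y, t, time⟩ := h
        rw [pvLoopA, pvLoopA]
        by_cases hc : (pvCell grid x y == "+") = true
        · rw [if_pos hc, if_pos hc]
        · rw [if_neg hc, if_neg hc]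
          dsimp only
          have hfc := pvExpand_fc M N grid (x, y, t) v
          apply ih
          · simp at hf ⊢; omega
          · simp at hg ⊢; omega

-- one level of A's queue loop: with the queue = (rest of level k) ++ (already-built part of
-- level k + 1), A either returns k (a goal in the level) or proceeds with the completed level k + 1
theorem pvLoopA_level (M N : Int) (grid : List (List String)) (f : Nat)
    (front : List (Int × Int × Int)) :
    ∀ (acc : List (Int × Int × Int)) (v : pvVis) (k : Int),
    pvLoopA M N grid (front.length + f) (pvTag4 k front ++ pvTag4 (k + 1) acc) v =
      (if front.any (fun q => pvCell grid q.1 q.2.1 == "+") then k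
       else
         let r := front.foldl (fun acc s =>
           let r := pvExpand M N grid s acc.2
           (acc.1 ++ r.1, r.2)) (acc, v)
         pvLoopA M N grid f (pvTag4 (k + 1) r.1) r.2) := by
  induction front with
  | nil =>
    intro acc v k
    simp [pvTag4]
  | cons s rest ih =>
    intro acc v k
    have hA : pvTag4 k (s :: rest) ++ pvTag4 (k + 1) acc
        = (s.1, s.2.1, s.2.2, k) :: (pvTag4 k rest ++ pvTag4 (k + 1) acc) := by
      simp [pvTag4]
    have hF : (s :: rest).length + f = (rest.length + f) + 1 := by
      simp; omega
    rw [hA, hF, pvLoopA]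
    by_cases hg : (pvCell grid s.1 s.2.1 == "+") = true
    · rw [if_pos hg]
      simp [hg]
    · rw [if_neg hg]
      dsimp only
      have hq : (pvTag4 k rest ++ pvTag4 (k + 1) acc) ++
            (pvExpand M N grid (s.1, s.2.1, s.2.2) v).1.map (fun u => (u.1, u.2.1, u.2.2, k + 1))
          = pvTag4 k rest ++ pvTag4 (k + 1) (acc ++ (pvExpand M N grid s v).1) := by
        simp [pvTag4]
      rw [hq, ih]
      have hgf : (pvCell grid s.1 s.2.1 == "+") = false := by simpa using hg
      simp only [List.any_cons, hgf, Bool.false_or]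
      simp

theorem pvLoopAB (M N : Int) (grid : List (List String)) :
    ∀ (n : Nat) (front : List (Int × Int × Int)) (v : pvVis) (k : Int),
    front.length + pvFc3 v < n →
    pvLoopA M N grid n (pvTag4 k front) v = pvLoopB M N grid n front v k := by
  intro n
  induction n with
  | zero => intro front v k hn; omega
  | succ m ih =>
    intro front v k hn
    cases front with
    | nil => rfl
    | cons s rest =>
      have hlen : rest.length + 1 + pvFc3 v < m + 1 := by simpa using hn
      have hm : m + 1 = (s :: rest).length + (m - rest.length) := by simp; omega
      have h2 : pvTag4 k (s :: rest) ++ pvTag4 (k + 1) [] = pvTag4 k (s :: rest) := by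
        simp [pvTag4]
      have h1 := pvLoopA_level M N grid (m - rest.length) (s :: rest) [] v k
      rw [h2] at h1
      conv_lhs => rw [hm]
      rw [h1]
      rw [pvLoopB]
      by_cases hg : ((s :: rest).any (fun q => pvCell grid q.1 q.2.1 == "+")) = true
      · rw [if_pos hg, if_pos hg]
      · rw [if_neg hg, if_neg hg]
        dsimp only
        have hfc := pvExpandLevel_fc M N grid (s :: rest) v
        have hEL : (pvExpandLevel M N grid (s :: rest) v)
            = List.foldl (fun acc s => (acc.1 ++ (pvExpand M N grid s acc.2).1, (pvExpand M N grid s acc.2).2)) ([], v) (s :: rest) := by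
          simp [pvExpandLevel]
        rw [← hEL]
        have hmeas : (pvExpandLevel M N grid (s :: rest) v).1.length
            + pvFc3 (pvExpandLevel M N grid (s :: rest) v).2 < m := by
          omega
        rw [pvLoopA_fuel M N grid (m - rest.length) m (pvTag4 (k + 1) (pvExpandLevel M N grid (s :: rest) v).1) (pvExpandLevel M N grid (s :: rest) v).2
          (by simp [pvTag4]; omega) (by simp [pvTag4]; omega)]
        exact ih (pvExpandLevel M N grid (s :: rest) v).1 (pvExpandLevel M N grid (s :: rest) v).2 (k + 1) (by omega)

-- ---------- read-after-write for the Bool visited table ----------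

theorem pvGet3_set3_self (v : pvVis) (x y t : Int)
    (hx : 0 ≤ x) (hy : 0 ≤ y) (ht : 0 ≤ t) :
    pvGet3 (pvSet3 v x y t) x y t = true := by
  unfold pvGet3 pvSet3
  rw [if_pos ⟨hx, hy, ht⟩, if_pos ⟨hx, hy, ht⟩]
  simp only [List.getD_eq_getElem?_getD]
  cases hv : v[x.toNat]? with
  | none =>
    rw [List.set_eq_of_length_le (List.getElem?_eq_none_iff.mp hv), hv]
  | some p =>
    have h1 : x.toNat < v.length := by rcases List.getElem?_eq_some_iff.mp hv with ⟨h,-⟩; exact h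
    rw [List.getElem?_set_self h1]
    dsimp only
    simp only [hv, Option.getD_some]
    cases hp : p[y.toNat]? with
    | none =>
      rw [List.set_eq_of_length_le (List.getElem?_eq_none_iff.mp hp), hp]
    | some r =>
      have h2 : y.toNat < p.length := by rcases List.getElem?_eq_some_iff.mp hp with ⟨h,-⟩; exact h
      rw [List.getElem?_set_self h2]
      dsimp only
      simp only [hp, Option.getD_some]
      cases hr : r[t.toNat]? with
      | none =>
        rw [List.set_eq_of_length_le (List.getElem?_eq_none_iff.mp hr), hr]
      | some b =>
        have h3 : t.toNat < r.length := by rcases List.getElem?_eq_some_iff.mp hr with ⟨h,-⟩; exact h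
        rw [List.getElem?_set_self h3]

theorem pvGet3_set3_ne (v : pvVis) (x y t x' y' t' : Int)
    (hne : ¬ (x' = x ∧ y' = y ∧ t' = t)) :
    pvGet3 (pvSet3 v x y t) x' y' t' = pvGet3 v x' y' t' := by
  by_cases hq : 0 ≤ x' ∧ 0 ≤ y' ∧ 0 ≤ t'
  · by_cases hw : 0 ≤ x ∧ 0 ≤ y ∧ 0 ≤ t
    · unfold pvGet3 pvSet3
      rw [if_pos hw, if_pos hq, if_pos hq]
      simp only [List.getD_eq_getElem?_getD]
      by_cases hxx : x'.toNat = x.toNat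
      · rw [hxx]
        cases hv : v[x.toNat]? with
        | none =>
          rw [List.set_eq_of_length_le (List.getElem?_eq_none_iff.mp hv), hv]
        | some p =>
          have h1 : x.toNat < v.length := by rcases List.getElem?_eq_some_iff.mp hv with ⟨h,-⟩; exact h
          rw [List.getElem?_set_self h1]
          dsimp only
          simp only [hv, Option.getD_some]
          by_cases hyy : y'.toNat = y.toNat
          · have htt : t'.toNat ≠ t.toNat := by omega
            rw [hyy]
            cases hp : p[y.toNat]? with
            | none =>
              rw [List.set_eq_of_length_le (List.getElem?_eq_none_iff.mp hp), hp]
            | some r =>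
              have h2 : y.toNat < p.length := by rcases List.getElem?_eq_some_iff.mp hp with ⟨h,-⟩; exact h
              rw [List.getElem?_set_self h2]
              dsimp only
              simp only [hp, Option.getD_some]
              rw [List.getElem?_set_ne (fun h => htt h.symm)]
          · rw [List.getElem?_set_ne (fun h => hyy h.symm)]
      · rw [List.getElem?_set_ne (fun h => hxx h.symm)]
    · unfold pvSet3
      rw [if_neg hw]
  · unfold pvGet3
    rw [if_neg hq, if_neg hq]

theorem pvMem_of_getElem? {α : Type} {l : List α} {i : Nat} {a : α}
    (h : l[i]? = some a) : a ∈ l := by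
  rcases List.getElem?_eq_some_iff.mp h with ⟨hlt, he⟩
  exact he ▸ List.getElem_mem hlt

theorem pvShape_setI (M N T : Int) (D : List (List (List Int))) (x y t val : Int)
    (h : pvShape M N T D) (hs : pvInbnd M N T (x, y, t)) :
    pvShape M N T (pvSetI D x y t val) := by
  obtain ⟨hlen, hmem⟩ := h
  obtain ⟨hx0, hxM, hy0, hyN, ht0, htT⟩ := hs
  simp only at hx0 hxM hy0 hyN ht0 htT
  have h1 : x.toNat < D.length := by omega
  cases hv : D[x.toNat]? with
  | none => rw [List.getElem?_eq_getElem h1] at hv; simp at hv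
  | some p =>
    have hgd : D.getD x.toNat [] = p := by
      rw [List.getD_eq_getElem?_getD, hv]; rfl
    obtain ⟨hpl', hpm⟩ := hmem p (pvMem_of_getElem? hv)
    have h2 : y.toNat < p.length := by omega
    cases hp : p[y.toNat]? with
    | none => rw [List.getElem?_eq_getElem h2] at hp; simp at hp
    | some r =>
      have hgd2 : p.getD y.toNat [] = r := by
        rw [List.getD_eq_getElem?_getD, hp]; rfl
      unfold pvSetI
      rw [hgd, hgd2]
      refine ⟨by simpa using hlen, ?_⟩
      intro pl hpl
      rcases List.mem_or_eq_of_mem_set hpl with hin | heq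
      · exact hmem pl hin
      · subst heq
        refine ⟨by simpa using hpl', ?_⟩
        intro row hrow
        rcases List.mem_or_eq_of_mem_set hrow with h3 | h3
        · exact hpm row h3
        · subst h3
          simpa using hpm r (pvMem_of_getElem? hp)

theorem pvGetI_setI_self (M N T : Int) (D : List (List (List Int))) (x y t val : Int)
    (hsh : pvShape M N T D) (hs : pvInbnd M N T (x, y, t)) :
    pvGetI (pvSetI D x y t val) x y t = val := by
  obtain ⟨hlen, hmem⟩ := hsh
  obtain ⟨hx0, hxM, hy0, hyN, ht0, htT⟩ := hs
  simp only at hx0 hxM hy0 hyN ht0 htT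
  have h1 : x.toNat < D.length := by omega
  cases hv : D[x.toNat]? with
  | none => rw [List.getElem?_eq_getElem h1] at hv; simp at hv
  | some p =>
    have hgd : D.getD x.toNat [] = p := by
      rw [List.getD_eq_getElem?_getD, hv]; rfl
    obtain ⟨hpl', hpm⟩ := hmem p (pvMem_of_getElem? hv)
    have h2 : y.toNat < p.length := by omega
    cases hp : p[y.toNat]? with
    | none => rw [List.getElem?_eq_getElem h2] at hp; simp at hp
    | some r =>
      have hgd2 : p.getD y.toNat [] = r := by
        rw [List.getD_eq_getElem?_getD, hp]; rfl
      have h3 : t.toNat < r.length := by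
        have := hpm r (pvMem_of_getElem? hp); omega
      unfold pvGetI pvSetI
      rw [hgd, hgd2]
      rw [List.getD_eq_getElem?_getD (l := D.set x.toNat _), List.getElem?_set_self h1]
      simp only [Option.getD_some]
      rw [List.getD_eq_getElem?_getD (l := p.set y.toNat _), List.getElem?_set_self h2]
      simp only [Option.getD_some]
      rw [List.getD_eq_getElem?_getD (l := r.set t.toNat val), List.getElem?_set_self h3]
      rfl

theorem pvGetI_setI_ne (D : List (List (List Int))) (x y t val x' y' t' : Int)
    (hx : 0 ≤ x) (hy : 0 ≤ y) (ht : 0 ≤ t) (hx' : 0 ≤ x') (hy' : 0 ≤ y') (ht' : 0 ≤ t')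
    (hne : ¬ (x' = x ∧ y' = y ∧ t' = t)) :
    pvGetI (pvSetI D x y t val) x' y' t' = pvGetI D x' y' t' := by
  unfold pvGetI pvSetI
  simp only [List.getD_eq_getElem?_getD]
  by_cases hxx : x'.toNat = x.toNat
  · rw [hxx]
    cases hv : D[x.toNat]? with
    | none =>
      rw [List.set_eq_of_length_le (List.getElem?_eq_none_iff.mp hv), hv]
    | some p =>
      have h1 : x.toNat < D.length := by
        rcases List.getElem?_eq_some_iff.mp hv with ⟨h, -⟩; exact h
      rw [List.getElem?_set_self h1]
      simp only [hv, Option.getD_some]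
      by_cases hyy : y'.toNat = y.toNat
      · have htt : t'.toNat ≠ t.toNat := by omega
        rw [hyy]
        cases hp : p[y.toNat]? with
        | none =>
          rw [List.set_eq_of_length_le (List.getElem?_eq_none_iff.mp hp), hp]
        | some r =>
          have h2 : y.toNat < p.length := by
            rcases List.getElem?_eq_some_iff.mp hp with ⟨h, -⟩; exact h
          rw [List.getElem?_set_self h2]
          simp only [hp, Option.getD_some]
          rw [List.getElem?_set_ne (fun h => htt h.symm)]
      · rw [List.getElem?_set_ne (fun h => hyy h.symm)]
  · rw [List.getElem?_set_ne (fun h => hxx h.symm)]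

theorem pvShape_T0 (M N T : Int) : pvShape M N T (pvT0 M N T) := by
  unfold pvShape pvT0
  refine ⟨by simp, ?_⟩
  intro pl hpl
  have := List.eq_of_mem_replicate hpl
  subst this
  refine ⟨by simp, ?_⟩
  intro row hrow
  have := List.eq_of_mem_replicate hrow
  subst this
  simp

theorem pvGetI_T0 (M N T : Int) (s : Int × Int × Int) (hs : pvInbnd M N T s) :
    pvGetI (pvT0 M N T) s.1 s.2.1 s.2.2 = pvInf M N T := by
  obtain ⟨hx0, hxM, hy0, hyN, ht0, htT⟩ := hs
  unfold pvGetI pvT0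
  rw [List.getD_replicate _ (by omega), List.getD_replicate _ (by omega),
    List.getD_replicate _ (by omega)]

theorem pvGet3_vis0 (M N T : Int) (s : Int × Int × Int) (hs : pvInbnd M N T s) :
    pvGet3 (pvVis0 M N T) s.1 s.2.1 s.2.2 = false := by
  obtain ⟨hx0, hxM, hy0, hyN, ht0, htT⟩ := hs
  unfold pvGet3 pvVis0
  rw [if_pos ⟨hx0, hy0, ht0⟩]
  rw [List.getElem?_replicate, if_pos (by omega)]
  dsimp only
  rw [List.getElem?_replicate, if_pos (by omega)]
  dsimp only
  rw [List.getElem?_replicate, if_pos (by omega)]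

-- ---------- the expansion as a fold of a pvTgt-keyed action ----------

def pvStepT (M N : Int) (grid : List (List String))
    (acc : List (Int × Int × Int) × pvVis) (pd : (Int × Int × Int) × (Int × Int)) :
    List (Int × Int × Int) × pvVis :=
  match pvTgt M N grid pd.1 pd.2 with
  | some u => if pvGet3 acc.2 u.1 u.2.1 u.2.2 then acc
      else (acc.1 ++ [u], pvSet3 acc.2 u.1 u.2.1 u.2.2)
  | none => acc

theorem pvStep1_eq_stepT (M N : Int) (grid : List (List String)) (s : Int × Int × Int)
    (d : Int × Int) (acc : List (Int × Int × Int) × pvVis) :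
    pvStep1 M N grid (s.1 + d.1) (s.2.1 + d.2) s.2.2 acc = pvStepT M N grid acc (s, d) := by
  unfold pvStep1 pvStepT pvTgt
  by_cases hb : 0 ≤ s.1 + d.1 ∧ s.1 + d.1 < M ∧ 0 ≤ s.2.1 + d.2 ∧ s.2.1 + d.2 < N
  · rw [if_pos hb]
    simp only [if_pos hb]
    by_cases hc1 : (pvCell grid (s.1 + d.1) (s.2.1 + d.2) == "*"
        || pvCell grid (s.1 + d.1) (s.2.1 + d.2) == "+") = true
    · simp only [hc1, if_true]
    · simp only [hc1]
      simp only [Bool.false_eq_true, if_false]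
      by_cases hc2 : (pvCell grid (s.1 + d.1) (s.2.1 + d.2) == "#") = true
      · have hc2' : pvCell grid (s.1 + d.1) (s.2.1 + d.2) = "#" := by simpa using hc2
        simp only [hc2, if_true]
        by_cases hq : 0 < s.2.2
        · by_cases hg : pvGet3 acc.2 (s.1 + d.1) (s.2.1 + d.2) (s.2.2 - 1) = true
          · rw [if_neg (by simp [hg])]
            rw [if_pos (show pvCell grid (s.1 + d.1) (s.2.1 + d.2) = "#" ∧ 0 < s.2.2 from ⟨hc2', hq⟩)]
            dsimp only
            rw [if_pos hg]
          · have hg' : pvGet3 acc.2 (s.1 + d.1) (s.2.1 + d.2) (s.2.2 - 1) = false := by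
              simpa using hg
            rw [if_pos ⟨hq, hg'⟩, if_pos ⟨hc2', hq⟩]
            dsimp only
            rw [if_neg (by simp [hg'])]
        · rw [if_neg (fun h => hq h.1), if_neg (fun h => hq h.2)]
      · have hc2' : ¬ pvCell grid (s.1 + d.1) (s.2.1 + d.2) = "#" := by simpa using hc2
        simp only [hc2]
        simp only [Bool.false_eq_true, if_false]
        rw [if_neg (fun h : pvCell grid (s.1 + d.1) (s.2.1 + d.2) = "#" ∧ 0 < s.2.2 => hc2' h.1)]
  · rw [if_neg hb]
    simp only [if_neg hb]

theorem pvExpand_eq_stepT (M N : Int) (grid : List (List String)) (s : Int × Int × Int)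
    (v : pvVis) :
    pvExpand M N grid s v = (pvDirs.map (fun d => (s, d))).foldl (pvStepT M N grid) ([], v) := by
  unfold pvExpand
  rw [List.foldl_map]
  simp only [pvStep1_eq_stepT]

theorem pvStepT_shift (M N : Int) (grid : List (List String)) :
    ∀ (L : List ((Int × Int × Int) × (Int × Int))) (l0 : List (Int × Int × Int)) (v : pvVis),
    L.foldl (pvStepT M N grid) (l0, v)
      = (l0 ++ (L.foldl (pvStepT M N grid) ([], v)).1, (L.foldl (pvStepT M N grid) ([], v)).2) := by
  intro L
  induction L with
  | nil => intro l0 v; simp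
  | cons pd L ih =>
    intro l0 v
    rw [List.foldl_cons, List.foldl_cons]
    cases htgt : pvTgt M N grid pd.1 pd.2 with
    | none => simp only [pvStepT, htgt]; exact ih l0 v
    | some u =>
      by_cases hg : pvGet3 v u.1 u.2.1 u.2.2 = true
      · simp only [pvStepT, htgt, hg, if_true]
        exact ih l0 v
      · have hg' : pvGet3 v u.1 u.2.1 u.2.2 = false := by simpa using hg
        simp only [pvStepT, htgt, hg', Bool.false_eq_true, if_false, List.nil_append]
        rw [ih (l0 ++ [u]), ih [u]]
        simp

theorem pvLevel_eq_stepT (M N : Int) (grid : List (List String)) :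
    ∀ (front : List (Int × Int × Int)) (l0 : List (Int × Int × Int)) (v : pvVis),
    front.foldl (fun acc s =>
        (acc.1 ++ (pvExpand M N grid s acc.2).1, (pvExpand M N grid s acc.2).2)) (l0, v)
      = (l0 ++ ((front.flatMap (fun p => pvDirs.map (fun d => (p, d)))).foldl
            (pvStepT M N grid) ([], v)).1,
         ((front.flatMap (fun p => pvDirs.map (fun d => (p, d)))).foldl
            (pvStepT M N grid) ([], v)).2) := by
  intro front
  induction front with
  | nil => intro l0 v; simp
  | cons p rest ih =>
    intro l0 v
    rw [List.foldl_cons]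
    dsimp only
    rw [pvExpand_eq_stepT, ih]
    rw [List.flatMap_cons, List.foldl_append]
    rw [pvStepT_shift M N grid (rest.flatMap (fun p => pvDirs.map (fun d => (p, d))))
      ((pvDirs.map (fun d => (p, d))).foldl (pvStepT M N grid) ([], v)).1
      ((pvDirs.map (fun d => (p, d))).foldl (pvStepT M N grid) ([], v)).2]
    simp

theorem pvExpandLevel_eq_stepT (M N : Int) (grid : List (List String))
    (front : List (Int × Int × Int)) (v : pvVis) :
    pvExpandLevel M N grid front v
      = ((front.flatMap (fun p => pvDirs.map (fun d => (p, d)))).foldl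
          (pvStepT M N grid) ([], v)) := by
  unfold pvExpandLevel
  rw [pvLevel_eq_stepT]
  simp

-- ---------- what one expansion does, as sets ----------

theorem pvTgt_nonneg (M N : Int) (grid : List (List String)) (p : Int × Int × Int)
    (d : Int × Int) (u : Int × Int × Int) (h : pvTgt M N grid p d = some u) (hp : 0 ≤ p.2.2) :
    0 ≤ u.1 ∧ 0 ≤ u.2.1 ∧ 0 ≤ u.2.2 := by
  unfold pvTgt at h
  split_ifs at h with h1 h2 h3
  · cases h
    exact ⟨h1.1, h1.2.2.1, hp⟩
  · obtain ⟨hc, hq⟩ := h3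
    cases h
    refine ⟨h1.1, h1.2.2.1, ?_⟩
    simp only
    omega

theorem pvTgt_inbnd (M N T : Int) (grid : List (List String)) (p : Int × Int × Int)
    (d : Int × Int) (u : Int × Int × Int) (h : pvTgt M N grid p d = some u)
    (hp0 : 0 ≤ p.2.2) (hpT : p.2.2 ≤ T) : pvInbnd M N T u := by
  unfold pvTgt at h
  split_ifs at h with h1 h2 h3
  · cases h
    exact ⟨h1.1, h1.2.1, h1.2.2.1, h1.2.2.2, hp0, hpT⟩
  · obtain ⟨hc, hq⟩ := h3
    cases h
    refine ⟨h1.1, h1.2.1, h1.2.2.1, h1.2.2.2, ?_, ?_⟩ <;> simp only <;> omega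

theorem pvStepT_char (M N : Int) (grid : List (List String)) :
    ∀ (L : List ((Int × Int × Int) × (Int × Int))) (v : pvVis) (l0 : List (Int × Int × Int)),
    (∀ pd ∈ L, 0 ≤ pd.1.2.2) →
    ((∀ w : Int × Int × Int,
       (pvGet3 (L.foldl (pvStepT M N grid) (l0, v)).2 w.1 w.2.1 w.2.2 = true ↔
         pvGet3 v w.1 w.2.1 w.2.2 = true ∨ ∃ pd ∈ L, pvTgt M N grid pd.1 pd.2 = some w)) ∧
     (∀ u, u ∈ (L.foldl (pvStepT M N grid) (l0, v)).1 ↔ u ∈ l0 ∨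
        ((∃ pd ∈ L, pvTgt M N grid pd.1 pd.2 = some u) ∧
          pvGet3 v u.1 u.2.1 u.2.2 = false))) := by
  intro L
  induction L with
  | nil =>
    intro v l0 _
    constructor
    · intro w; simp
    · intro u; simp
  | cons pd L ih =>
    intro v l0 hnn
    have hnnL : ∀ qd ∈ L, 0 ≤ qd.1.2.2 := fun qd hqd => hnn qd (List.mem_cons_of_mem _ hqd)
    rw [List.foldl_cons]
    cases htgt : pvTgt M N grid pd.1 pd.2 with
    | none =>
      simp only [pvStepT, htgt]
      obtain ⟨ihv, ihm⟩ := ih v l0 hnnL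
      constructor
      · intro w
        rw [ihv w]
        constructor
        · intro h; rcases h with h | ⟨qd, hqd, hq⟩
          · exact Or.inl h
          · exact Or.inr ⟨qd, List.mem_cons_of_mem _ hqd, hq⟩
        · intro h; rcases h with h | ⟨qd, hqd, hq⟩
          · exact Or.inl h
          · rcases List.mem_cons.mp hqd with rfl | hqd'
            · rw [htgt] at hq; cases hq
            · exact Or.inr ⟨qd, hqd', hq⟩
      · intro u
        rw [ihm u]
        constructor
        · intro h; rcases h with h | ⟨⟨qd, hqd, hq⟩, hg⟩
          · exact Or.inl h
          · exact Or.inr ⟨⟨qd, List.mem_cons_of_mem _ hqd, hq⟩, hg⟩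
        · intro h; rcases h with h | ⟨⟨qd, hqd, hq⟩, hg⟩
          · exact Or.inl h
          · rcases List.mem_cons.mp hqd with rfl | hqd'
            · rw [htgt] at hq; cases hq
            · exact Or.inr ⟨⟨qd, hqd', hq⟩, hg⟩
    | some u0 =>
      have hu0nn : 0 ≤ u0.1 ∧ 0 ≤ u0.2.1 ∧ 0 ≤ u0.2.2 :=
        pvTgt_nonneg M N grid pd.1 pd.2 u0 htgt (hnn pd (List.mem_cons_self))
      by_cases hg0 : pvGet3 v u0.1 u0.2.1 u0.2.2 = true
      · simp only [pvStepT, htgt, hg0, if_true]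
        obtain ⟨ihv, ihm⟩ := ih v l0 hnnL
        constructor
        · intro w
          rw [ihv w]
          constructor
          · intro h; rcases h with h | ⟨qd, hqd, hq⟩
            · exact Or.inl h
            · exact Or.inr ⟨qd, List.mem_cons_of_mem _ hqd, hq⟩
          · intro h; rcases h with h | ⟨qd, hqd, hq⟩
            · exact Or.inl h
            · rcases List.mem_cons.mp hqd with rfl | hqd'
              · rw [htgt] at hq
                cases hq
                exact Or.inl hg0
              · exact Or.inr ⟨qd, hqd', hq⟩
        · intro u
          rw [ihm u]
          constructor
          · intro h; rcases h with h | ⟨⟨qd, hqd, hq⟩, hg⟩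
            · exact Or.inl h
            · exact Or.inr ⟨⟨qd, List.mem_cons_of_mem _ hqd, hq⟩, hg⟩
          · intro h; rcases h with h | ⟨⟨qd, hqd, hq⟩, hg⟩
            · exact Or.inl h
            · rcases List.mem_cons.mp hqd with rfl | hqd'
              · rw [htgt] at hq
                cases hq
                rw [hg0] at hg; cases hg
              · exact Or.inr ⟨⟨qd, hqd', hq⟩, hg⟩
      · have hg0' : pvGet3 v u0.1 u0.2.1 u0.2.2 = false := by simpa using hg0
        simp only [pvStepT, htgt, hg0', Bool.false_eq_true, if_false]
        obtain ⟨ihv, ihm⟩ := ih (pvSet3 v u0.1 u0.2.1 u0.2.2) (l0 ++ [u0]) hnnL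
        constructor
        · intro w
          rw [ihv w]
          by_cases hwu : w = u0
          · subst hwu
            rw [pvGet3_set3_self v w.1 w.2.1 w.2.2 hu0nn.1 hu0nn.2.1 hu0nn.2.2]
            constructor
            · intro _; exact Or.inr ⟨pd, List.mem_cons_self, htgt⟩
            · intro _; exact Or.inl rfl
          · have hne : ¬ (w.1 = u0.1 ∧ w.2.1 = u0.2.1 ∧ w.2.2 = u0.2.2) := by
              intro hc
              exact hwu (by
                obtain ⟨a, b, c⟩ := w
                obtain ⟨a', b', c'⟩ := u0
                simp only at hc
                simp [hc.1, hc.2.1, hc.2.2])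
            rw [pvGet3_set3_ne v u0.1 u0.2.1 u0.2.2 w.1 w.2.1 w.2.2 hne]
            constructor
            · intro h; rcases h with h | ⟨qd, hqd, hq⟩
              · exact Or.inl h
              · exact Or.inr ⟨qd, List.mem_cons_of_mem _ hqd, hq⟩
            · intro h; rcases h with h | ⟨qd, hqd, hq⟩
              · exact Or.inl h
              · rcases List.mem_cons.mp hqd with rfl | hqd'
                · rw [htgt] at hq
                  cases hq
                  exact absurd rfl hwu
                · exact Or.inr ⟨qd, hqd', hq⟩
        · intro u
          rw [ihm u]
          by_cases huu : u = u0
          · subst huu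
            constructor
            · intro _
              exact Or.inr ⟨⟨pd, List.mem_cons_self, htgt⟩, hg0'⟩
            · intro _
              exact Or.inl (by simp)
          · have hne : ¬ (u.1 = u0.1 ∧ u.2.1 = u0.2.1 ∧ u.2.2 = u0.2.2) := by
              intro hc
              exact huu (by
                obtain ⟨a, b, c⟩ := u
                obtain ⟨a', b', c'⟩ := u0
                simp only at hc
                simp [hc.1, hc.2.1, hc.2.2])
            rw [pvGet3_set3_ne v u0.1 u0.2.1 u0.2.2 u.1 u.2.1 u.2.2 hne]
            constructor
            · intro h
              rcases h with hmem | ⟨⟨qd, hqd, hq⟩, hg⟩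
              · rcases List.mem_append.mp hmem with h' | h'
                · exact Or.inl h'
                · simp at h'
                  exact absurd h' huu
              · exact Or.inr ⟨⟨qd, List.mem_cons_of_mem _ hqd, hq⟩, hg⟩
            · intro h
              rcases h with hmem | ⟨⟨qd, hqd, hq⟩, hg⟩
              · exact Or.inl (List.mem_append_left _ hmem)
              · rcases List.mem_cons.mp hqd with rfl | hqd'
                · rw [htgt] at hq
                  cases hq
                  exact absurd rfl huu
                · exact Or.inr ⟨⟨qd, hqd', hq⟩, hg⟩

-- ---------- facts about the ideal level sets ----------

theorem pvV_zero (M N : Int) (grid : List (List String)) (st0 s : Int × Int × Int) :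
    pvV M N grid st0 0 s ↔ s = st0 := Iff.rfl

theorem pvV_mono (M N : Int) (grid : List (List String)) (st0 : Int × Int × Int) :
    ∀ (k m : Nat), k ≤ m → ∀ s, pvV M N grid st0 k s → pvV M N grid st0 m s := by
  intro k m h
  induction m with
  | zero =>
    intro s hs
    have : k = 0 := by omega
    subst this
    exact hs
  | succ m ih =>
    intro s hs
    by_cases hk : k = m + 1
    · subst hk; exact hs
    · exact Or.inl (ih (by omega) s hs)

theorem pvV_inbnd (M N T : Int) (grid : List (List String)) (st0 : Int × Int × Int)
    (hst0 : pvInbnd M N T st0) (hT : 0 ≤ T) :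
    ∀ (k : Nat) (s : Int × Int × Int), pvV M N grid st0 k s → pvInbnd M N T s := by
  intro k
  induction k with
  | zero => intro s hs; rw [pvV_zero] at hs; subst hs; exact hst0
  | succ k ih =>
    intro s hs
    rcases hs with hs | ⟨p, hp, _, hd, hdm, htgt⟩
    · exact ih s hs
    · have hpin := ih p hp
      exact pvTgt_inbnd M N T grid p hd s htgt hpin.2.2.2.2.1 hpin.2.2.2.2.2

theorem pvV_stab (M N : Int) (grid : List (List String)) (st0 : Int × Int × Int) (r : Nat)
    (h : ∀ s, pvV M N grid st0 (r + 1) s ↔ pvV M N grid st0 r s) :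
    ∀ (m : Nat) (s : Int × Int × Int), pvV M N grid st0 m s → pvV M N grid st0 r s := by
  intro m
  induction m with
  | zero => intro s hs; exact pvV_mono M N grid st0 0 r (Nat.zero_le r) s hs
  | succ m ih =>
    intro s hs
    rcases hs with hs | ⟨p, hp, hc, he⟩
    · exact ih s hs
    · exact (h s).mp (Or.inr ⟨p, ih p hp, hc, he⟩)

theorem pvLev_le (M N : Int) (grid : List (List String)) (st0 s : Int × Int × Int) (k : Nat)
    (h : pvV M N grid st0 k s) : pvLev M N grid st0 s ≤ k :=
  Nat.sInf_le h

theorem pvV_lev (M N : Int) (grid : List (List String)) (st0 s : Int × Int × Int) (k : Nat)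
    (h : pvV M N grid st0 k s) : pvV M N grid st0 (pvLev M N grid st0 s) s := by
  have hm : sInf {j | pvV M N grid st0 j s} ∈ {j | pvV M N grid st0 j s} :=
    Nat.sInf_mem ⟨k, h⟩
  exact hm

theorem pvLev_eq (M N : Int) (grid : List (List String)) (st0 s : Int × Int × Int) (k : Nat)
    (h : pvV M N grid st0 k s) (h2 : ∀ j < k, ¬ pvV M N grid st0 j s) :
    pvLev M N grid st0 s = k := by
  have h1 := pvLev_le M N grid st0 s k h
  by_contra hne
  have hlt : pvLev M N grid st0 s < k := by omega
  exact h2 _ hlt (pvV_lev M N grid st0 s k h)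

theorem pvLev_st0 (M N : Int) (grid : List (List String)) (st0 : Int × Int × Int) :
    pvLev M N grid st0 st0 = 0 :=
  pvLev_eq M N grid st0 st0 0 rfl (by omega)

-- ---------- the level loop computes the least goal level ----------

theorem pvLoopLem (M N T : Int) (grid : List (List String)) (st0 : Int × Int × Int)
    (hst0 : pvInbnd M N T st0) (hT : 0 ≤ T) :
    ∀ (f : Nat) (F : List (Int × Int × Int)) (v : pvVis) (k : Nat),
    F.length + pvFc3 v < f →
    (∀ s, pvInbnd M N T s → (pvGet3 v s.1 s.2.1 s.2.2 = true ↔ pvV M N grid st0 k s)) →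
    (∀ s, s ∈ F ↔ (pvV M N grid st0 k s ∧ ¬ pvVb M N grid st0 k s)) →
    (∀ j, j < k → ¬ pvHit M N grid st0 j) →
    (∃ k' : Nat, pvLoopB M N grid f F v (k : Int) = (k' : Int) ∧ pvHit M N grid st0 k' ∧
        (∀ j, j < k' → ¬ pvHit M N grid st0 j) ∧ k' ≤ k + F.length + pvFc3 v)
      ∨ (pvLoopB M N grid f F v (k : Int) = -1 ∧ ∀ j, ¬ pvHit M N grid st0 j) := by
  intro f
  induction f with
  | zero => intro F v k hfuel; omega
  | succ f0 ih =>
    intro F v k hfuel hcv hf hnb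
    cases F with
    | nil =>
      right
      refine ⟨rfl, ?_⟩
      cases k with
      | zero =>
        exact absurd ((hf st0).mpr ⟨rfl, not_false⟩) (List.not_mem_nil)
      | succ k0 =>
        have hstab : ∀ s, pvV M N grid st0 (k0 + 1) s ↔ pvV M N grid st0 k0 s := by
          intro s
          constructor
          · intro hs
            by_contra hns
            exact absurd ((hf s).mpr ⟨hs, hns⟩) (List.not_mem_nil)
          · exact pvV_mono M N grid st0 k0 (k0 + 1) (by omega) s
        intro j hj
        obtain ⟨s, hs, hsplus⟩ := hj
        exact hnb k0 (by omega) ⟨s, pvV_stab M N grid st0 k0 hstab j s hs, hsplus⟩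
    | cons s0 rest =>
      rw [pvLoopB]
      by_cases hgoal : ((s0 :: rest).any (fun q => pvCell grid q.1 q.2.1 == "+")) = true
      · rw [if_pos hgoal]
        left
        refine ⟨k, rfl, ?_, hnb, by omega⟩
        obtain ⟨q, hq, hq2⟩ := List.any_eq_true.mp hgoal
        exact ⟨q, ((hf q).mp hq).1, by simpa using hq2⟩
      · rw [if_neg hgoal]
        dsimp only
        have hnoplus : ∀ q ∈ s0 :: rest, pvCell grid q.1 q.2.1 ≠ "+" := by
          intro q hq hplus
          exact hgoal (List.any_eq_true.mpr ⟨q, hq, by simpa using hplus⟩)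
        have hFinb : ∀ q ∈ s0 :: rest, pvInbnd M N T q := fun q hq =>
          pvV_inbnd M N T grid st0 hst0 hT k q ((hf q).mp hq).1
        -- the expansion, characterised as sets
        rw [pvExpandLevel_eq_stepT]
        set L := ((s0 :: rest).flatMap (fun p => pvDirs.map (fun d => (p, d)))) with hL
        have hnnL : ∀ pd ∈ L, 0 ≤ pd.1.2.2 := by
          intro pd hpd
          rw [hL] at hpd
          obtain ⟨p, hp, hpd2⟩ := List.mem_flatMap.mp hpd
          obtain ⟨d, _, rfl⟩ := List.mem_map.mp hpd2
          exact (hFinb p hp).2.2.2.2.1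
        obtain ⟨chv, chm⟩ := pvStepT_char M N grid L v [] hnnL
        have hprod : ∀ u, (∃ pd ∈ L, pvTgt M N grid pd.1 pd.2 = some u) ↔
            ∃ p ∈ s0 :: rest, pvEdge M N grid p u := by
          intro u
          constructor
          · intro h
            obtain ⟨pd, hpd, htg⟩ := h
            rw [hL] at hpd
            obtain ⟨p, hp, hpd2⟩ := List.mem_flatMap.mp hpd
            obtain ⟨d, hd, rfl⟩ := List.mem_map.mp hpd2
            exact ⟨p, hp, d, hd, htg⟩
          · intro h
            obtain ⟨p, hp, d, hd, htg⟩ := h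
            refine ⟨(p, d), ?_, htg⟩
            rw [hL]
            exact List.mem_flatMap.mpr ⟨p, hp, List.mem_map.mpr ⟨d, hd, rfl⟩⟩
        set E := L.foldl (pvStepT M N grid) ([], v) with hE
        -- new visited characterisation
        have hVsucc_of_mem : ∀ u p, p ∈ s0 :: rest → pvEdge M N grid p u →
            pvV M N grid st0 (k + 1) u := by
          intro u p hp he
          exact Or.inr ⟨p, ((hf p).mp hp).1, hnoplus p hp, he⟩
        have hmem_of_new : ∀ u, pvV M N grid st0 (k + 1) u → ¬ pvV M N grid st0 k u →
            ∃ p ∈ s0 :: rest, pvEdge M N grid p u := by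
          intro u hu hnu
          rcases hu with hu | ⟨p, hpk, hpc, he⟩
          · exact absurd hu hnu
          · refine ⟨p, ?_, he⟩
            by_contra hpF
            have hvb : pvVb M N grid st0 k p := by
              by_contra hvb
              exact hpF ((hf p).mpr ⟨hpk, hvb⟩)
            cases k with
            | zero => exact hvb
            | succ k0 =>
              exact hnu (Or.inr ⟨p, hvb, hpc, he⟩)
        have hcv' : ∀ u, pvInbnd M N T u →
            (pvGet3 E.2 u.1 u.2.1 u.2.2 = true ↔ pvV M N grid st0 (k + 1) u) := by
          intro u hu
          rw [chv u, hcv u hu, hprod u]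
          constructor
          · intro h
            rcases h with h | ⟨p, hp, he⟩
            · exact pvV_mono M N grid st0 k (k + 1) (by omega) u h
            · exact hVsucc_of_mem u p hp he
          · intro h
            by_cases hk : pvV M N grid st0 k u
            · exact Or.inl hk
            · exact Or.inr (hmem_of_new u h hk)
        have hf' : ∀ u, u ∈ E.1 ↔
            (pvV M N grid st0 (k + 1) u ∧ ¬ pvVb M N grid st0 (k + 1) u) := by
          intro u
          rw [chm u]
          simp only [List.not_mem_nil, false_or]
          constructor
          · intro h
            obtain ⟨⟨pd, hpd, htg⟩, hg⟩ := h
            have hpe : ∃ p ∈ s0 :: rest, pvEdge M N grid p u := (hprod u).mp ⟨pd, hpd, htg⟩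
            obtain ⟨p, hp, he⟩ := hpe
            have hu : pvInbnd M N T u := by
              have hpin := hFinb p hp
              obtain ⟨d, hd, htg2⟩ := he
              exact pvTgt_inbnd M N T grid p d u htg2 hpin.2.2.2.2.1 hpin.2.2.2.2.2
            refine ⟨hVsucc_of_mem u p hp he, ?_⟩
            show ¬ pvV M N grid st0 k u
            intro hk
            rw [(hcv u hu).mpr hk] at hg
            cases hg
          · intro h
            obtain ⟨hu1, hu2⟩ := h
            have hnk : ¬ pvV M N grid st0 k u := hu2
            have hu : pvInbnd M N T u := pvV_inbnd M N T grid st0 hst0 hT (k + 1) u hu1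
            refine ⟨(hprod u).mpr (hmem_of_new u hu1 hnk), ?_⟩
            cases hgv : pvGet3 v u.1 u.2.1 u.2.2 with
            | false => rfl
            | true => exact absurd ((hcv u hu).mp hgv) hnk
        have hnb' : ∀ j, j < k + 1 → ¬ pvHit M N grid st0 j := by
          intro j hj
          by_cases hjk : j < k
          · exact hnb j hjk
          · have hj' : j = k := by omega
            rw [hj']
            intro hhit
            obtain ⟨q, hq, hq2⟩ := hhit
            by_cases hqF : q ∈ s0 :: rest
            · exact hnoplus q hqF hq2
            · have hvb : pvVb M N grid st0 k q := by
                by_contra hvb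
                exact hqF ((hf q).mpr ⟨hq, hvb⟩)
              cases k with
              | zero => exact hvb
              | succ k0 => exact hnb k0 (by omega) ⟨q, hvb, hq2⟩
        have hfc := pvExpandLevel_fc M N grid (s0 :: rest) v
        rw [pvExpandLevel_eq_stepT, ← hL, ← hE] at hfc
        have hfuel' : E.1.length + pvFc3 E.2 < f0 := by
          have : (s0 :: rest).length + pvFc3 v < f0 + 1 := hfuel
          simp only [List.length_cons] at this
          omega
        have hcast : ((k : Int) + 1) = ((k + 1 : Nat) : Int) := by push_cast; ring
        rw [hcast]
        rcases ih E.1 E.2 (k + 1) hfuel' hcv' hf' hnb' with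
          ⟨k', hk1, hk2, hk3, hk4⟩ | ⟨h1, h2⟩
        · left
          refine ⟨k', hk1, hk2, hk3, ?_⟩
          simp only [List.length_cons]
          omega
        · right
          exact ⟨h1, h2⟩

-- ---------- B's sweep: characterisation of one synchronous round ----------

theorem pvRelaxDir_eq_tgt (M N : Int) (grid : List (List String)) (x y t d : Int)
    (nxt : List (List (List Int))) (dir : Int × Int) :
    pvRelaxDir M N grid x y t d nxt dir =
      match pvTgt M N grid (x, y, t) dir with
      | some u => if d + 1 < pvGetI nxt u.1 u.2.1 u.2.2
          then pvSetI nxt u.1 u.2.1 u.2.2 (d + 1) else nxt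
      | none => nxt := by
  unfold pvRelaxDir pvTgt
  by_cases hb : 0 ≤ x + dir.1 ∧ x + dir.1 < M ∧ 0 ≤ y + dir.2 ∧ y + dir.2 < N
  · simp only [if_pos hb]
    by_cases hc1 : (pvCell grid (x + dir.1) (y + dir.2) == "*"
        || pvCell grid (x + dir.1) (y + dir.2) == "+") = true
    · simp only [hc1, if_true]
    · simp only [hc1, Bool.false_eq_true, if_false]
      by_cases hc2 : (pvCell grid (x + dir.1) (y + dir.2) == "#") = true
      · have hc2' : pvCell grid (x + dir.1) (y + dir.2) = "#" := by simpa using hc2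
        by_cases hq : 0 < t
        · have hba : (pvCell grid (x + dir.1) (y + dir.2) == "#" && decide (0 < t)) = true := by
            simp [hc2, hq]
          simp only [hba, if_true]
          rw [if_pos (show pvCell grid (x + dir.1) (y + dir.2) = "#" ∧ 0 < t from ⟨hc2', hq⟩)]
        · have hba : (pvCell grid (x + dir.1) (y + dir.2) == "#" && decide (0 < t)) = false := by
            simp [hq]
          simp only [hba, Bool.false_eq_true, if_false]
          rw [if_neg (fun h : pvCell grid (x + dir.1) (y + dir.2) = "#" ∧ 0 < t => hq h.2)]
      · have hc2' : ¬ pvCell grid (x + dir.1) (y + dir.2) = "#" := by simpa using hc2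
        have hba : (pvCell grid (x + dir.1) (y + dir.2) == "#" && decide (0 < t)) = false := by
          simp [hc2']
        simp only [hba, Bool.false_eq_true, if_false]
        rw [if_neg (fun h : pvCell grid (x + dir.1) (y + dir.2) = "#" ∧ 0 < t => hc2' h.1)]
  · simp only [if_neg hb]

-- table/invariant carried through one round: processed relaxations E already written as r+1
def pvMid (M N T : Int) (grid : List (List String)) (st0 : Int × Int × Int) (r : Nat)
    (E : (Int × Int × Int) → Prop) (nxt : List (List (List Int))) : Prop :=
  pvShape M N T nxt ∧ ∀ s, pvInbnd M N T s →
    (pvV M N grid st0 r s → pvGetI nxt s.1 s.2.1 s.2.2 = (pvLev M N grid st0 s : Int)) ∧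
    (¬ pvV M N grid st0 r s →
      ((E s → pvGetI nxt s.1 s.2.1 s.2.2 = (r : Int) + 1) ∧
       (¬ E s → pvGetI nxt s.1 s.2.1 s.2.2 = pvInf M N T)))

theorem pvMid_congr (M N T : Int) (grid : List (List String)) (st0 : Int × Int × Int) (r : Nat)
    (E E' : (Int × Int × Int) → Prop) (nxt : List (List (List Int)))
    (h : pvMid M N T grid st0 r E nxt) (he : ∀ s, E s ↔ E' s) :
    pvMid M N T grid st0 r E' nxt := by
  obtain ⟨hsh, hval⟩ := h
  refine ⟨hsh, ?_⟩
  intro s hs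
  obtain ⟨h1, h2⟩ := hval s hs
  refine ⟨h1, fun hnv => ⟨fun hE => (h2 hnv).1 ((he s).mpr hE),
    fun hE => (h2 hnv).2 (fun hx => hE ((he s).mp hx))⟩⟩

theorem pvTriple_ne_components {u s : Int × Int × Int} (h : s ≠ u) :
    ¬ (s.1 = u.1 ∧ s.2.1 = u.2.1 ∧ s.2.2 = u.2.2) := by
  intro hc
  obtain ⟨a, b, c⟩ := s
  obtain ⟨a', b', c'⟩ := u
  simp only at hc
  exact h (by simp [hc.1, hc.2.1, hc.2.2])

theorem pvRelaxDir_mid (M N T : Int) (grid : List (List String)) (st0 : Int × Int × Int)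
    (r : Nat) (E : (Int × Int × Int) → Prop) (x y t d : Int)
    (nxt : List (List (List Int))) (dir : Int × Int) (hdir : dir ∈ pvDirs)
    (hu0 : pvInbnd M N T (x, y, t)) (hV : pvV M N grid st0 r (x, y, t))
    (hplus : pvCell grid x y ≠ "+")
    (hdval : d = (pvLev M N grid st0 (x, y, t) : Int))
    (hrS : (r : Int) + 1 < pvInf M N T)
    (hmid : pvMid M N T grid st0 r E nxt) :
    pvMid M N T grid st0 r
      (fun s => E s ∨ pvTgt M N grid (x, y, t) dir = some s)
      (pvRelaxDir M N grid x y t d nxt dir) := by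
  rw [pvRelaxDir_eq_tgt]
  cases htgt : pvTgt M N grid (x, y, t) dir with
  | none =>
    exact pvMid_congr M N T grid st0 r E _ nxt hmid
      (fun s => ⟨Or.inl, fun h => by
        rcases h with h | h
        · exact h
        · cases h⟩)
  | some u =>
    dsimp only
    have hedge : pvEdge M N grid (x, y, t) u := ⟨dir, hdir, htgt⟩
    have hu : pvInbnd M N T u := pvTgt_inbnd M N T grid (x, y, t) dir u htgt
      hu0.2.2.2.2.1 hu0.2.2.2.2.2
    have hlev_u : pvLev M N grid st0 u ≤ pvLev M N grid st0 (x, y, t) + 1 :=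
      pvLev_le M N grid st0 u _ (Or.inr ⟨(x, y, t),
        pvV_lev M N grid st0 (x, y, t) r hV, hplus, hedge⟩)
    have hlevp_le : pvLev M N grid st0 (x, y, t) ≤ r := pvLev_le M N grid st0 (x, y, t) r hV
    obtain ⟨hsh, hval⟩ := hmid
    by_cases hVu : pvV M N grid st0 r u
    · -- target already reached: its level is ≤ d + 1, so no write happens
      have hget : pvGetI nxt u.1 u.2.1 u.2.2 = (pvLev M N grid st0 u : Int) :=
        (hval u hu).1 hVu
      have hnw : ¬ (d + 1 < pvGetI nxt u.1 u.2.1 u.2.2) := by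
        rw [hget, hdval]
        push_cast
        omega
    
      rw [if_neg hnw]
      refine ⟨hsh, ?_⟩
      intro s hs
      obtain ⟨h1, h2⟩ := hval s hs
      refine ⟨h1, fun hnv => ⟨?_, ?_⟩⟩
      · intro hE
        rcases hE with hE | hE
        · exact (h2 hnv).1 hE
        · cases hE
          exact absurd hVu hnv
      · intro hE
        exact (h2 hnv).2 (fun hx => hE (Or.inl hx))
    · -- target new this round: its producers all sit at level exactly r
      have hlevp_eq : pvLev M N grid st0 (x, y, t) = r := by
        by_contra hne
        have hlt : pvLev M N grid st0 (x, y, t) < r := by omega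
        exact hVu (pvV_mono M N grid st0 (pvLev M N grid st0 (x, y, t) + 1) r (by omega) u
          (Or.inr ⟨(x, y, t), pvV_lev M N grid st0 (x, y, t) r hV, hplus, hedge⟩))
      have hd1 : d + 1 = (r : Int) + 1 := by rw [hdval, hlevp_eq]
      by_cases hEu : E u
      · have hget : pvGetI nxt u.1 u.2.1 u.2.2 = (r : Int) + 1 :=
          ((hval u hu).2 hVu).1 hEu
        have hnw : ¬ (d + 1 < pvGetI nxt u.1 u.2.1 u.2.2) := by
          rw [hget, hd1]; omega
        rw [if_neg hnw]
        refine ⟨hsh, ?_⟩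
        intro s hs
        obtain ⟨h1, h2⟩ := hval s hs
        refine ⟨h1, fun hnv => ⟨?_, ?_⟩⟩
        · intro hE
          rcases hE with hE | hE
          · exact (h2 hnv).1 hE
          · cases hE
            exact ((hval u hu).2 hVu).1 hEu
        · intro hE
          exact (h2 hnv).2 (fun hx => hE (Or.inl hx))
      · have hget : pvGetI nxt u.1 u.2.1 u.2.2 = pvInf M N T :=
          ((hval u hu).2 hVu).2 hEu
        have hw : d + 1 < pvGetI nxt u.1 u.2.1 u.2.2 := by
          rw [hget, hd1]; omega
        rw [if_pos hw]
        refine ⟨pvShape_setI M N T nxt u.1 u.2.1 u.2.2 (d + 1) hsh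
          (by obtain ⟨a, b, c⟩ := u; exact hu), ?_⟩
        intro s hs
        by_cases hsu : s = u
        · subst hsu
          have hself : pvGetI (pvSetI nxt s.1 s.2.1 s.2.2 (d + 1)) s.1 s.2.1 s.2.2 = d + 1 :=
            pvGetI_setI_self M N T nxt s.1 s.2.1 s.2.2 (d + 1) hsh
              (by obtain ⟨a, b, c⟩ := s; exact hs)
          refine ⟨fun hV' => absurd hV' hVu, fun hnv => ⟨fun _ => by rw [hself, hd1], ?_⟩⟩
          intro hE
          exact absurd (Or.inr rfl) hE
        · have hne := pvTriple_ne_components hsu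
          have hkeep : pvGetI (pvSetI nxt u.1 u.2.1 u.2.2 (d + 1)) s.1 s.2.1 s.2.2
              = pvGetI nxt s.1 s.2.1 s.2.2 :=
            pvGetI_setI_ne nxt u.1 u.2.1 u.2.2 (d + 1) s.1 s.2.1 s.2.2
              hu.1 hu.2.2.1 hu.2.2.2.2.1 hs.1 hs.2.2.1 hs.2.2.2.2.1 hne
          obtain ⟨h1, h2⟩ := hval s hs
          rw [hkeep]
          refine ⟨h1, fun hnv => ⟨?_, ?_⟩⟩
          · intro hE
            rcases hE with hE | hE
            · exact (h2 hnv).1 hE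
            · cases hE
              exact absurd rfl hsu
          · intro hE
            exact (h2 hnv).2 (fun hx => hE (Or.inl hx))

theorem pvRelaxDirs_mid (M N T : Int) (grid : List (List String)) (st0 : Int × Int × Int)
    (r : Nat) (x y t d : Int)
    (hu0 : pvInbnd M N T (x, y, t)) (hV : pvV M N grid st0 r (x, y, t))
    (hplus : pvCell grid x y ≠ "+")
    (hdval : d = (pvLev M N grid st0 (x, y, t) : Int))
    (hrS : (r : Int) + 1 < pvInf M N T) :
    ∀ (ds : List (Int × Int)), (∀ dd ∈ ds, dd ∈ pvDirs) →
    ∀ (E : (Int × Int × Int) → Prop) (nxt : List (List (List Int))),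
    pvMid M N T grid st0 r E nxt →
    pvMid M N T grid st0 r
      (fun s => E s ∨ ∃ dd ∈ ds, pvTgt M N grid (x, y, t) dd = some s)
      (ds.foldl (pvRelaxDir M N grid x y t d) nxt) := by
  intro ds
  induction ds with
  | nil =>
    intro _ E nxt hmid
    exact pvMid_congr M N T grid st0 r E _ nxt hmid
      (fun s => ⟨Or.inl, fun h => by
        rcases h with h | ⟨dd, hdd, _⟩
        · exact h
        · exact absurd hdd (List.not_mem_nil)⟩)
  | cons dd ds ih =>
    intro hds E nxt hmid
    rw [List.foldl_cons]
    have h1 := pvRelaxDir_mid M N T grid st0 r E x y t d nxt dd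
      (hds dd List.mem_cons_self) hu0 hV hplus hdval hrS hmid
    have h2 := ih (fun e he => hds e (List.mem_cons_of_mem _ he))
      (fun s => E s ∨ pvTgt M N grid (x, y, t) dd = some s)
      (pvRelaxDir M N grid x y t d nxt dd) h1
    exact pvMid_congr M N T grid st0 r _ _ _ h2 (fun s => by
      constructor
      · intro h
        rcases h with (h | h) | ⟨e, he, hp⟩
        · exact Or.inl h
        · exact Or.inr ⟨dd, List.mem_cons_self, h⟩
        · exact Or.inr ⟨e, List.mem_cons_of_mem _ he, hp⟩
      · intro h
        rcases h with h | ⟨e, he, hp⟩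
        · exact Or.inl (Or.inl h)
        · rcases List.mem_cons.mp he with rfl | he'
          · exact Or.inl (Or.inr hp)
          · exact Or.inr ⟨e, he', hp⟩)

-- the per-state relaxation condition a processed state u0 contributes
def pvRel (M N : Int) (grid : List (List String)) (st0 : Int × Int × Int) (r : Nat)
    (u0 s : Int × Int × Int) : Prop :=
  pvV M N grid st0 r u0 ∧ pvCell grid u0.1 u0.2.1 ≠ "+" ∧ pvEdge M N grid u0 s

theorem pvRelaxCell_mid (M N T : Int) (grid : List (List String)) (st0 : Int × Int × Int)
    (r : Nat) (dist : List (List (List Int))) (hdist : pvCharD M N T grid st0 r dist)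
    (hrS : (r : Int) + 1 < pvInf M N T)
    (u0 : Int × Int × Int) (hu0 : pvInbnd M N T u0)
    (E : (Int × Int × Int) → Prop) (nxt : List (List (List Int)))
    (hmid : pvMid M N T grid st0 r E nxt) :
    pvMid M N T grid st0 r (fun s => E s ∨ pvRel M N grid st0 r u0 s)
      (pvRelaxCell M N T grid dist nxt u0.1 u0.2.1 u0.2.2) := by
  obtain ⟨hdsh, hdval⟩ := hdist
  unfold pvRelaxCell
  by_cases hVu0 : pvV M N grid st0 r u0
  · by_cases hplus : pvCell grid u0.1 u0.2.1 = "+"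
    · rw [if_neg (fun h => h.2 hplus)]
      exact pvMid_congr M N T grid st0 r E _ nxt hmid
        (fun s => ⟨Or.inl, fun h => by
          rcases h with h | ⟨_, hc, _⟩
          · exact h
          · exact absurd hplus hc⟩)
    · have hd : pvGetI dist u0.1 u0.2.1 u0.2.2 = (pvLev M N grid st0 u0 : Int) :=
        (hdval u0 hu0).1 hVu0
      have hcond : pvGetI dist u0.1 u0.2.1 u0.2.2 < pvInf M N T ∧
          pvCell grid u0.1 u0.2.1 ≠ "+" := by
        refine ⟨?_, hplus⟩
        rw [hd]
        have := pvLev_le M N grid st0 u0 r hVu0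
        push_cast
        omega
      rw [if_pos hcond]
      have hu0' : pvInbnd M N T (u0.1, u0.2.1, u0.2.2) := by
        obtain ⟨a, b, c⟩ := u0; exact hu0
      have hV' : pvV M N grid st0 r (u0.1, u0.2.1, u0.2.2) := by
        obtain ⟨a, b, c⟩ := u0; exact hVu0
      have h2 := pvRelaxDirs_mid M N T grid st0 r u0.1 u0.2.1 u0.2.2
        (pvGetI dist u0.1 u0.2.1 u0.2.2) hu0' hV'
        (by obtain ⟨a, b, c⟩ := u0; exact hplus)
        (by obtain ⟨a, b, c⟩ := u0; exact hd) hrS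
        pvDirs (fun dd hdd => hdd) E nxt hmid
      refine pvMid_congr M N T grid st0 r _ _ _ h2 (fun s => ?_)
      constructor
      · intro h
        rcases h with h | ⟨dd, hdd, hp⟩
        · exact Or.inl h
        · exact Or.inr ⟨hVu0, hplus, dd, hdd, by obtain ⟨a, b, c⟩ := u0; exact hp⟩
      · intro h
        rcases h with h | ⟨_, hc, dd, hdd, hp⟩
        · exact Or.inl h
        · exact Or.inr ⟨dd, hdd, by obtain ⟨a, b, c⟩ := u0; exact hp⟩
  · have hd : pvGetI dist u0.1 u0.2.1 u0.2.2 = pvInf M N T := (hdval u0 hu0).2 hVu0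
    rw [if_neg (fun h => by rw [hd] at h; exact absurd h.1 (lt_irrefl _))]
    exact pvMid_congr M N T grid st0 r E _ nxt hmid
      (fun s => ⟨Or.inl, fun h => by
        rcases h with h | ⟨hc, _, _⟩
        · exact h
        · exact absurd hc hVu0⟩)

-- ---------- one full round over all coordinates ----------

theorem pvFoldl_flatMap {α β γ : Type} (g : α → List β) (f : γ → β → γ) (l : List α) (c : γ) :
    (l.flatMap g).foldl f c = l.foldl (fun c a => (g a).foldl f c) c := by
  induction l generalizing c with
  | nil => rfl
  | cons a l ih => rw [List.flatMap_cons, List.foldl_append, List.foldl_cons, ih]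

def pvCoords (M N T : Int) : List (Int × Int × Int) :=
  (PySem.List.pyRange 0 M 1).flatMap (fun x =>
    (PySem.List.pyRange 0 N 1).flatMap (fun y =>
      (PySem.List.pyRange 0 (T + 1) 1).map (fun t => (x, y, t))))

theorem pvMem_coords (M N T : Int) (u : Int × Int × Int) :
    u ∈ pvCoords M N T ↔ pvInbnd M N T u := by
  obtain ⟨x, y, t⟩ := u
  unfold pvCoords pvInbnd
  simp only [List.mem_flatMap, List.mem_map, PySem.List.mem_pyRange_one, Prod.mk.injEq]
  constructor
  · intro ⟨x', hx', y', hy', t', ht', h1, h2, h3⟩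
    subst h1; subst h2; subst h3
    exact ⟨hx'.1, hx'.2, hy'.1, hy'.2, ht'.1, by omega⟩
  · intro ⟨h1, h2, h3, h4, h5, h6⟩
    exact ⟨x, ⟨h1, h2⟩, y, ⟨h3, h4⟩, t, ⟨h5, by omega⟩, rfl, rfl, rfl⟩

theorem pvRound_eq_coords (M N T : Int) (grid : List (List String))
    (dist : List (List (List Int))) :
    pvRound M N T grid dist = (pvCoords M N T).foldl
      (fun nxt u => pvRelaxCell M N T grid dist nxt u.1 u.2.1 u.2.2) dist := by
  unfold pvRound pvCoords
  simp only [pvFoldl_flatMap, List.foldl_map]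

theorem pvRoundFold_mid (M N T : Int) (grid : List (List String)) (st0 : Int × Int × Int)
    (r : Nat) (dist : List (List (List Int))) (hdist : pvCharD M N T grid st0 r dist)
    (hrS : (r : Int) + 1 < pvInf M N T) :
    ∀ (LU : List (Int × Int × Int)), (∀ u ∈ LU, pvInbnd M N T u) →
    ∀ (E : (Int × Int × Int) → Prop) (nxt : List (List (List Int))),
    pvMid M N T grid st0 r E nxt →
    pvMid M N T grid st0 r (fun s => E s ∨ ∃ u0 ∈ LU, pvRel M N grid st0 r u0 s)
      (LU.foldl (fun nxt u => pvRelaxCell M N T grid dist nxt u.1 u.2.1 u.2.2) nxt) := by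
  intro LU
  induction LU with
  | nil =>
    intro _ E nxt hmid
    exact pvMid_congr M N T grid st0 r E _ nxt hmid
      (fun s => ⟨Or.inl, fun h => by
        rcases h with h | ⟨u0, hu0, _⟩
        · exact h
        · exact absurd hu0 (List.not_mem_nil)⟩)
  | cons u0 LU ih =>
    intro hLU E nxt hmid
    rw [List.foldl_cons]
    have h1 := pvRelaxCell_mid M N T grid st0 r dist hdist hrS u0
      (hLU u0 List.mem_cons_self) E nxt hmid
    have h2 := ih (fun u hu => hLU u (List.mem_cons_of_mem _ hu))
      (fun s => E s ∨ pvRel M N grid st0 r u0 s) _ h1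
    exact pvMid_congr M N T grid st0 r _ _ _ h2 (fun s => by
      constructor
      · intro h
        rcases h with (h | h) | ⟨u1, hu1, hp⟩
        · exact Or.inl h
        · exact Or.inr ⟨u0, List.mem_cons_self, h⟩
        · exact Or.inr ⟨u1, List.mem_cons_of_mem _ hu1, hp⟩
      · intro h
        rcases h with h | ⟨u1, hu1, hp⟩
        · exact Or.inl (Or.inl h)
        · rcases List.mem_cons.mp hu1 with rfl | hu1'
          · exact Or.inl (Or.inr hp)
          · exact Or.inr ⟨u1, hu1', hp⟩)

theorem pvRound_char (M N T : Int) (grid : List (List String)) (st0 : Int × Int × Int)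
    (r : Nat) (dist : List (List (List Int)))
    (hst0 : pvInbnd M N T st0) (hT : 0 ≤ T)
    (hdist : pvCharD M N T grid st0 r dist) (hrS : (r : Int) + 1 < pvInf M N T) :
    pvCharD M N T grid st0 (r + 1) (pvRound M N T grid dist) := by
  rw [pvRound_eq_coords]
  have h0 : pvMid M N T grid st0 r (fun _ => False) dist :=
    ⟨hdist.1, fun s hs => ⟨(hdist.2 s hs).1,
      fun hnv => ⟨False.elim, fun _ => (hdist.2 s hs).2 hnv⟩⟩⟩
  have h1 := pvRoundFold_mid M N T grid st0 r dist hdist hrS (pvCoords M N T)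
    (fun u hu => (pvMem_coords M N T u).mp hu) _ dist h0
  obtain ⟨hsh, hval⟩ := h1
  refine ⟨hsh, ?_⟩
  intro s hs
  constructor
  · intro hV1
    by_cases hVr : pvV M N grid st0 r s
    · exact (hval s hs).1 hVr
    · have hE : (fun _ : Int × Int × Int => False) s ∨
          ∃ u0 ∈ pvCoords M N T, pvRel M N grid st0 r u0 s := by
        rcases hV1 with h | ⟨p, hp, hc, he⟩
        · exact absurd h hVr
        · exact Or.inr ⟨p, (pvMem_coords M N T p).mpr
            (pvV_inbnd M N T grid st0 hst0 hT r p hp), hp, hc, he⟩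
      have hval2 := ((hval s hs).2 hVr).1 hE
      have hlev : pvLev M N grid st0 s = r + 1 :=
        pvLev_eq M N grid st0 s (r + 1) hV1
          (fun j hj hVj => hVr (pvV_mono M N grid st0 j r (by omega) s hVj))
      rw [hval2, hlev]
      push_cast
      ring
  · intro hnV1
    have hnVr : ¬ pvV M N grid st0 r s :=
      fun h => hnV1 (pvV_mono M N grid st0 r (r + 1) (by omega) s h)
    refine ((hval s hs).2 hnVr).2 ?_
    intro hE
    rcases hE with hF | ⟨u0, _, hrel⟩
    · exact hF
    · exact hnV1 (Or.inr ⟨u0, hrel.1, hrel.2.1, hrel.2.2⟩)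

-- ---------- the sweep loop ----------

theorem pvSweep_char (M N T : Int) (grid : List (List String)) (st0 : Int × Int × Int)
    (hst0 : pvInbnd M N T st0) (hT : 0 ≤ T) :
    ∀ (f : Nat) (D : List (List (List Int))) (r : Nat),
    pvCharD M N T grid st0 r D → (r : Int) + (f : Int) = M * N * (T + 1) →
    ∃ r', pvCharD M N T grid st0 r' (pvSweep M N T grid f D) ∧
      (r' : Int) ≤ M * N * (T + 1) ∧
      (r' = (M * N * (T + 1)).toNat ∨
        (∀ s, pvV M N grid st0 (r' + 1) s ↔ pvV M N grid st0 r' s)) := by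
  intro f
  induction f with
  | zero =>
    intro D r hd hsum
    refine ⟨r, hd, by omega, Or.inl ?_⟩
    omega
  | succ f0 ih =>
    intro D r hd hsum
    rw [pvSweep]
    have hrS : (r : Int) + 1 < pvInf M N T := by
      unfold pvInf
      push_cast at hsum
      omega
    have hchar' := pvRound_char M N T grid st0 r D hst0 hT hd hrS
    by_cases heq : pvRound M N T grid D = D
    · rw [if_pos heq]
      refine ⟨r, hd, by push_cast at hsum ⊢; omega, Or.inr ?_⟩
      intro s
      constructor
      · intro hV1
        by_contra hVr
        have hsin : pvInbnd M N T s := pvV_inbnd M N T grid st0 hst0 hT (r + 1) s hV1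
        have h1 := (hchar'.2 s hsin).1 hV1
        have h2 := (hd.2 s hsin).2 hVr
        rw [heq] at h1
        rw [h1] at h2
        have hlev := pvLev_le M N grid st0 s (r + 1) hV1
        unfold pvInf at h2
        push_cast at hsum
        omega
      · exact pvV_mono M N grid st0 r (r + 1) (by omega) s
    · rw [if_neg heq]
      exact ih (pvRound M N T grid D) (r + 1) hchar' (by push_cast at hsum ⊢; omega)

-- ---------- bounds for the final minimum pass ----------

theorem pvInbnd_iff (M N T x y t : Int) : pvInbnd M N T (x, y, t) ↔
    0 ≤ x ∧ x < M ∧ 0 ≤ y ∧ y < N ∧ 0 ≤ t ∧ t ≤ T := by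
  unfold pvInbnd
  simp only

theorem pvFold_dec {α : Type} (f : Int → α → Int) (hdec : ∀ b a, f b a ≤ b) :
    ∀ (l : List α) (b0 : Int), l.foldl f b0 ≤ b0 := by
  intro l
  induction l with
  | nil => intro b0; simp
  | cons a l ih => intro b0; exact le_trans (ih (f b0 a)) (hdec b0 a)

theorem pvFold_lb {α : Type} (f : Int → α → Int) (c : Int) :
    ∀ (l : List α), (∀ b a, a ∈ l → c ≤ b → c ≤ f b a) →
    ∀ (b0 : Int), c ≤ b0 → c ≤ l.foldl f b0 := by
  intro l
  induction l with
  | nil => intro _ b0 hb; simpa using hb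
  | cons a l ih =>
    intro hstep b0 hb
    exact ih (fun b a' ha' hcb => hstep b a' (List.mem_cons_of_mem _ ha') hcb)
      (f b0 a) (hstep b0 a List.mem_cons_self hb)

theorem pvFold_through {α : Type} (f : Int → α → Int) (hdec : ∀ b a, f b a ≤ b)
    (a0 : α) (X : Int) (hX : ∀ b, f b a0 ≤ X) :
    ∀ (l : List α), a0 ∈ l → ∀ (b0 : Int), l.foldl f b0 ≤ X := by
  intro l
  induction l with
  | nil => intro h; cases h
  | cons a l ih =>
    intro hmem b0
    rcases List.mem_cons.mp hmem with rfl | hmem'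
    · exact le_trans (pvFold_dec f hdec l (f b0 a0)) (hX b0)
    · exact ih hmem' (f b0 a)

def pvPairs (M N : Int) : List (Int × Int) :=
  (PySem.List.pyRange 0 M 1).flatMap (fun x => (PySem.List.pyRange 0 N 1).map (fun y => (x, y)))

theorem pvMem_pairs (M N : Int) (x y : Int) :
    (x, y) ∈ pvPairs M N ↔ 0 ≤ x ∧ x < M ∧ 0 ≤ y ∧ y < N := by
  unfold pvPairs
  simp only [List.mem_flatMap, List.mem_map, PySem.List.mem_pyRange_one, Prod.mk.injEq]
  constructor
  · intro ⟨x', hx', y', hy', h1, h2⟩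
    subst h1; subst h2
    exact ⟨hx'.1, hx'.2, hy'.1, hy'.2⟩
  · intro ⟨h1, h2, h3, h4⟩
    exact ⟨x, ⟨h1, h2⟩, y, ⟨h3, h4⟩, rfl, rfl⟩

theorem pvBest_eq_pairs (M N T : Int) (grid : List (List String))
    (dist : List (List (List Int))) :
    pvBest M N T grid dist = (pvPairs M N).foldl (fun best xy =>
      if pvCell grid xy.1 xy.2 == "+" then
        (PySem.List.pyRange 0 (T + 1) 1).foldl (fun best t =>
          if pvGetI dist xy.1 xy.2 t < best then pvGetI dist xy.1 xy.2 t else best) best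
      else best) (pvInf M N T) := by
  unfold pvBest pvPairs
  simp only [pvFoldl_flatMap, List.foldl_map]

theorem pvBestStep_dec (M N T : Int) (grid : List (List String))
    (dist : List (List (List Int))) :
    ∀ (b : Int) (xy : Int × Int),
    (if pvCell grid xy.1 xy.2 == "+" then
        (PySem.List.pyRange 0 (T + 1) 1).foldl (fun best t =>
          if pvGetI dist xy.1 xy.2 t < best then pvGetI dist xy.1 xy.2 t else best) b
      else b) ≤ b := by
  intro b xy
  split_ifs with h
  · exact pvFold_dec _ (fun b t => by split_ifs with h2 <;> omega) _ b
  · exact le_refl b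

theorem pvBest_le (M N T : Int) (grid : List (List String)) (dist : List (List (List Int)))
    (x y t : Int) (hin : pvInbnd M N T (x, y, t)) (hplus : pvCell grid x y = "+") :
    pvBest M N T grid dist ≤ pvGetI dist x y t := by
  obtain ⟨h1, h2, h3, h4, h5, h6⟩ := (pvInbnd_iff M N T x y t).mp hin
  rw [pvBest_eq_pairs]
  refine pvFold_through _ (pvBestStep_dec M N T grid dist) (x, y) (pvGetI dist x y t)
    ?_ (pvPairs M N) ((pvMem_pairs M N x y).mpr ⟨h1, h2, h3, h4⟩) _
  intro b
  dsimp only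
  rw [if_pos (by simpa using hplus)]
  refine pvFold_through _ (fun b t' => by split_ifs with hh <;> omega) t (pvGetI dist x y t)
    ?_ _ ?_ b
  · intro b'
    split_ifs with hh <;> omega
  · rw [PySem.List.mem_pyRange_one]
    exact ⟨h5, by omega⟩

theorem pvBest_lb (M N T : Int) (grid : List (List String)) (dist : List (List (List Int)))
    (c : Int) (hcI : c ≤ pvInf M N T)
    (hall : ∀ x y t : Int, pvInbnd M N T (x, y, t) → pvCell grid x y = "+" →
      c ≤ pvGetI dist x y t) :
    c ≤ pvBest M N T grid dist := by
  rw [pvBest_eq_pairs]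
  refine pvFold_lb _ c (pvPairs M N) ?_ _ hcI
  intro b xy hxy hcb
  obtain ⟨x, y⟩ := xy
  have hb := (pvMem_pairs M N x y).mp hxy
  split_ifs with h
  · refine pvFold_lb _ c _ ?_ b hcb
    intro b' t' ht' hcb'
    rw [PySem.List.mem_pyRange_one] at ht'
    have hv := hall x y t' ((pvInbnd_iff M N T x y t').mpr
      ⟨hb.1, hb.2.1, hb.2.2.1, hb.2.2.2, ht'.1, by omega⟩) (by simpa using h)
    split_ifs with h2 <;> omega
  · exact hcb

theorem pvBest_le_inf (M N T : Int) (grid : List (List String))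
    (dist : List (List (List Int))) : pvBest M N T grid dist ≤ pvInf M N T := by
  rw [pvBest_eq_pairs]
  exact pvFold_dec _ (pvBestStep_dec M N T grid dist) _ _

-- ---------- the start scan ----------

theorem pvStart_bounds (M N : Int) (grid : List (List String)) (i j : Nat)
    (h : pvStart M N grid = some (i, j)) : i < M.toNat ∧ j < N.toNat := by
  unfold pvStart at h
  have hgen : ∀ (l : List Nat) (acc : Option (Nat × Nat)),
      (∀ i' ∈ l, i' < M.toNat) →
      (∀ i' j', acc = some (i', j') → i' < M.toNat ∧ j' < N.toNat) →
      ∀ i' j', (l.foldl (fun acc i =>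
        match ((grid.getD i []).take N.toNat).findIdx? (fun c => c == "@") with
        | some j => some (i, j)
        | none => acc) acc) = some (i', j') → i' < M.toNat ∧ j' < N.toNat := by
    intro l
    induction l with
    | nil => intro acc _ hacc; exact fun i' j' => hacc i' j'
    | cons a l ih =>
      intro acc hl hacc
      rw [List.foldl_cons]
      refine ih _ (fun i' hi' => hl i' (List.mem_cons_of_mem _ hi')) ?_
      intro i' j' hstep
      cases hf : ((grid.getD a []).take N.toNat).findIdx? (fun c => c == "@") with
      | none => rw [hf] at hstep; exact hacc i' j' hstep
      | some jj =>
        rw [hf] at hstep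
        cases hstep
        refine ⟨hl a List.mem_cons_self, ?_⟩
        have hlt := (List.findIdx?_eq_some_iff_findIdx_eq.mp hf).1
        have hlen : ((grid.getD a []).take N.toNat).length ≤ N.toNat := by
          simp [List.length_take]
        omega
  exact hgen (List.range M.toNat) none (fun i' hi' => List.mem_range.mp hi')
    (fun i' j' h' => by cases h') i j h

-- ---------- initial tables ----------

theorem pvS_eq (M N T : Int) (hM : 0 ≤ M) (hN : 0 ≤ N) (hT : 0 ≤ T) :
    (M * N * (T + 1)).toNat = M.toNat * N.toNat * (T.toNat + 1) := by
  have h : M * N * (T + 1) = ((M.toNat * N.toNat * (T.toNat + 1) : Nat) : Int) := by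
    push_cast [Int.toNat_of_nonneg hM, Int.toNat_of_nonneg hN, Int.toNat_of_nonneg hT]
    ring
  rw [h, Int.toNat_natCast]

theorem pvFc3_vis0 (M N T : Int) :
    pvFc3 (pvVis0 M N T) = M.toNat * N.toNat * (T.toNat + 1) := by
  unfold pvFc3 pvFc2 pvFc1 pvVis0
  simp [List.map_replicate, List.sum_replicate, List.count_replicate]
  ring

theorem pvCharD_init (M N T : Int) (grid : List (List String)) (st0 : Int × Int × Int)
    (hst0 : pvInbnd M N T st0) :
    pvCharD M N T grid st0 0 (pvSetI (pvT0 M N T) st0.1 st0.2.1 st0.2.2 0) := by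
  have hst0' : pvInbnd M N T (st0.1, st0.2.1, st0.2.2) := by
    obtain ⟨a, b, c⟩ := st0; exact hst0
  refine ⟨pvShape_setI M N T (pvT0 M N T) st0.1 st0.2.1 st0.2.2 0 (pvShape_T0 M N T) hst0', ?_⟩
  intro s hs
  constructor
  · intro hV
    have hs0 : s = st0 := hV
    subst hs0
    have hget : pvGetI (pvSetI (pvT0 M N T) s.1 s.2.1 s.2.2 0) s.1 s.2.1 s.2.2 = 0 :=
      pvGetI_setI_self M N T (pvT0 M N T) s.1 s.2.1 s.2.2 0 (pvShape_T0 M N T) hst0'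
    rw [hget, pvLev_st0]
    simp
  · intro hnV
    have hne : s ≠ st0 := fun h => hnV h
    rw [pvGetI_setI_ne (pvT0 M N T) st0.1 st0.2.1 st0.2.2 0 s.1 s.2.1 s.2.2
      hst0.1 hst0.2.2.1 hst0.2.2.2.2.1 hs.1 hs.2.2.1 hs.2.2.2.2.1
      (pvTriple_ne_components hne)]
    exact pvGetI_T0 M N T s hs

theorem pvCharV_init (M N T : Int) (grid : List (List String)) (st0 : Int × Int × Int)
    (hst0 : pvInbnd M N T st0) :
    ∀ s, pvInbnd M N T s →
      (pvGet3 (pvSet3 (pvVis0 M N T) st0.1 st0.2.1 st0.2.2) s.1 s.2.1 s.2.2 = true ↔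
        pvV M N grid st0 0 s) := by
  intro s hs
  constructor
  · intro hg
    by_contra hne
    have hne' : s ≠ st0 := fun h => hne (h : pvV M N grid st0 0 s)
    rw [pvGet3_set3_ne (pvVis0 M N T) st0.1 st0.2.1 st0.2.2 s.1 s.2.1 s.2.2
      (pvTriple_ne_components hne'), pvGet3_vis0 M N T s hs] at hg
    cases hg
  · intro hV
    have hs0 : s = st0 := hV
    subst hs0
    exact pvGet3_set3_self (pvVis0 M N T) s.1 s.2.1 s.2.2 hs.1 hs.2.2.1 hs.2.2.2.2.1

-- ===== VERDICT (by name: the statement is the Claim_ definition above) =====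
theorem min_time_to_reach_sasuke_spec : Claim_equal_min_time_to_reach_sasuke := by
  intro M N T grid _ hpre
  obtain ⟨hT, hrows, hlenr, hat⟩ := hpre
  unfold Spec_min_time_to_reach_sasuke min_time_to_reach_sasuke min_time_to_reach_sasuke_alt
  cases hstart : pvStart M N grid with
  | none => rfl
  | some sij =>
    obtain ⟨si, sj⟩ := sij
    obtain ⟨hiM, hjN⟩ := pvStart_bounds M N grid si sj hstart
    dsimp only
    have hM1 : 1 ≤ M := by omega
    have hN1 : 1 ≤ N := by omega
    have hst0 : pvInbnd M N T ((si : Int), (sj : Int), T) :=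
      (pvInbnd_iff M N T (si : Int) (sj : Int) T).mpr
        ⟨by omega, by omega, by omega, by omega, hT, le_refl T⟩
    have hSpos : 0 < M * N * (T + 1) :=
      mul_pos (mul_pos (by omega) (by omega)) (by omega)
    -- A's queue loop is the level loop
    have hA : pvLoopA M N grid (2 + pvFc3 (pvSet3 (pvVis0 M N T) (si : Int) (sj : Int) T))
        [((si : Int), (sj : Int), T, 0)] (pvSet3 (pvVis0 M N T) (si : Int) (sj : Int) T)
        = pvLoopB M N grid (2 + pvFc3 (pvSet3 (pvVis0 M N T) (si : Int) (sj : Int) T))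
          [((si : Int), (sj : Int), T)] (pvSet3 (pvVis0 M N T) (si : Int) (sj : Int) T) 0 := by
      have h := pvLoopAB M N grid
        (2 + pvFc3 (pvSet3 (pvVis0 M N T) (si : Int) (sj : Int) T))
        [((si : Int), (sj : Int), T)] (pvSet3 (pvVis0 M N T) (si : Int) (sj : Int) T) 0
        (by simp)
      simpa [pvTag4] using h
    rw [hA]
    -- table size bookkeeping
    have hfc0 : pvGet3 (pvVis0 M N T) (si : Int) (sj : Int) T = false :=
      pvGet3_vis0 M N T ((si : Int), (sj : Int), T) hst0
    have hfcS := pvFc3_set3 (pvVis0 M N T) (si : Int) (sj : Int) T hfc0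
    have htab : pvFc3 (pvVis0 M N T) = (M * N * (T + 1)).toNat := by
      rw [pvFc3_vis0, pvS_eq M N T (by omega) (by omega) hT]
    -- the level loop via the ideal sets
    have hres := pvLoopLem M N T grid ((si : Int), (sj : Int), T) hst0 hT
      (2 + pvFc3 (pvSet3 (pvVis0 M N T) (si : Int) (sj : Int) T))
      [((si : Int), (sj : Int), T)] (pvSet3 (pvVis0 M N T) (si : Int) (sj : Int) T) 0
      (by simp)
      (pvCharV_init M N T grid ((si : Int), (sj : Int), T) hst0)
      (by
        intro s
        rw [pvV_zero]
        constructor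
        · intro h
          rcases List.mem_cons.mp h with rfl | h'
          · exact ⟨rfl, not_false⟩
          · cases h'
        · intro ⟨h1, _⟩
          subst h1
          exact List.mem_cons_self)
      (fun j hj => absurd hj (by omega))
    simp only [Nat.cast_zero] at hres
    -- B's sweep via the ideal sets
    have hchar0 := pvCharD_init M N T grid ((si : Int), (sj : Int), T) hst0
    obtain ⟨r', hcharF, hr'le, hstab⟩ := pvSweep_char M N T grid
      ((si : Int), (sj : Int), T) hst0 hT ((M * N * (T + 1)).toNat)
      (pvSetI (pvT0 M N T) (si : Int) (sj : Int) T 0) 0 hchar0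
      (by simp [Int.toNat_of_nonneg (le_of_lt hSpos)])
    rcases hres with ⟨k', hk1, hk2, hk3, hk4⟩ | ⟨h1, h2⟩
    · rw [hk1]
      have hk'S : k' ≤ (M * N * (T + 1)).toNat := by
        simp only [List.length_singleton] at hk4
        omega
      obtain ⟨s0, hs0V, hs0plus⟩ := hk2
      have hs0inb := pvV_inbnd M N T grid ((si : Int), (sj : Int), T) hst0 hT k' s0 hs0V
      have hs0r' : pvV M N grid ((si : Int), (sj : Int), T) r' s0 := by
        rcases hstab with heq | hstab
        · exact pvV_mono M N grid ((si : Int), (sj : Int), T) k' r' (by omega) s0 hs0V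
        · exact pvV_stab M N grid ((si : Int), (sj : Int), T) r' hstab k' s0 hs0V
      have hlev : pvLev M N grid ((si : Int), (sj : Int), T) s0 = k' :=
        pvLev_eq M N grid ((si : Int), (sj : Int), T) s0 k' hs0V
          (fun j hj hVj => hk3 j hj ⟨s0, hVj, hs0plus⟩)
      have hget : pvGetI (pvSweep M N T grid (M * N * (T + 1)).toNat
          (pvSetI (pvT0 M N T) (si : Int) (sj : Int) T 0)) s0.1 s0.2.1 s0.2.2 = (k' : Int) := by
        rw [(hcharF.2 s0 hs0inb).1 hs0r', hlev]
      have hkS' : (k' : Int) ≤ M * N * (T + 1) := by omega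
      have hble : pvBest M N T grid (pvSweep M N T grid (M * N * (T + 1)).toNat
          (pvSetI (pvT0 M N T) (si : Int) (sj : Int) T 0)) ≤ (k' : Int) := by
        have h := pvBest_le M N T grid (pvSweep M N T grid (M * N * (T + 1)).toNat
            (pvSetI (pvT0 M N T) (si : Int) (sj : Int) T 0)) s0.1 s0.2.1 s0.2.2
          (by obtain ⟨a, b, c⟩ := s0; exact hs0inb) hs0plus
        rw [hget] at h
        exact h
      have hblb : (k' : Int) ≤ pvBest M N T grid (pvSweep M N T grid (M * N * (T + 1)).toNat
          (pvSetI (pvT0 M N T) (si : Int) (sj : Int) T 0)) := by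
        refine pvBest_lb M N T grid _ (k' : Int) (by unfold pvInf; omega) ?_
        intro x y t hin hplus
        by_cases hVr : pvV M N grid ((si : Int), (sj : Int), T) r' (x, y, t)
        · rw [(hcharF.2 (x, y, t) hin).1 hVr]
          have hlge : k' ≤ pvLev M N grid ((si : Int), (sj : Int), T) (x, y, t) := by
            by_contra hlt
            exact hk3 _ (by omega) ⟨(x, y, t),
              pvV_lev M N grid ((si : Int), (sj : Int), T) (x, y, t) r' hVr, hplus⟩
          omega
        · rw [(hcharF.2 (x, y, t) hin).2 hVr]
          unfold pvInf
          omega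
      rw [le_antisymm hble hblb, if_pos (by unfold pvInf; omega)]
    · rw [h1]
      have hbINF : pvBest M N T grid (pvSweep M N T grid (M * N * (T + 1)).toNat
          (pvSetI (pvT0 M N T) (si : Int) (sj : Int) T 0)) = pvInf M N T := by
        refine le_antisymm (pvBest_le_inf M N T grid _) ?_
        refine pvBest_lb M N T grid _ (pvInf M N T) (le_refl _) ?_
        intro x y t hin hplus
        have hVr : ¬ pvV M N grid ((si : Int), (sj : Int), T) r' (x, y, t) :=
          fun hV => h2 r' ⟨(x, y, t), hV, hplus⟩
        rw [(hcharF.2 (x, y, t) hin).2 hVr]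
      rw [hbINF, if_neg (lt_irrefl _)]
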